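-- pv_equiv track=rewrite | github.com/YJAJ/Intelligent_systems | Utility.py | best_neighbour_queens
-- ===== SOURCE A (Python) =====
-- import operator
-- from collections import defaultdict
--
-- def safe_queens_heuristic_cost(queens_state, no_queen):
--     not_safe = 0
--
--     for i in range(len(queens_state) - 1):
--         for j in range(i + 1, len(queens_state)):
--             # check column overlapping
--             if queens_state[i] % no_queen == queens_state[j] % no_queen:
--                 not_safe += 1
--             # check diagonal overlapping
--             if abs(queens_state[i] // no_queen - queens_state[j] // no_queen) == abs(
--                                     queens_state[i] % no_queen - queens_state[j] % no_queen):
--                 not_safe += 1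
--             # check row overlapping
--             if queens_state[i] // no_queen == queens_state[j] // no_queen:
--                 not_safe += 1
--
--     return not_safe
--
-- def best_neighbour_queens(current_queens, no_queen, current_heuristic_cost):
--     if len(current_queens)==1:
--         return current_queens
--     current_neighbours = list()
--     #make a combination of one column move for the queen on each row
--     for row_index in range(no_queen):
--         current_neighbour = current_queens.copy()
--         col_set = set()
--         for i in range(no_queen):
--             col_set.add(i)
--         current_col = current_queens[row_index]%no_queen
--         col_set.remove(current_col)
--         for remainder in col_set:
--             new_position = row_index*no_queen+remainder
--             current_neighbour[row_index] = new_position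
--             current_neighbours.append(current_neighbour.copy())
--
--     # select the neighbour with the lowest heuristic cost
--     best_neighbour = select_best_neighbour(current_neighbours, no_queen)
--
--         #if new_heuristic_cost < current_heuristic_cost:
--         # current_heuristic_cost = new_heuristic_cost
--     return best_neighbour
--
-- def select_best_neighbour(current_neighbours, no_queen):
--     neighbours_dict = defaultdict()
--     for current_neighbour in current_neighbours:
--         new_heuristic_cost = safe_queens_heuristic_cost(current_neighbour, no_queen)
--         neighbours_dict[new_heuristic_cost] = current_neighbour
--     best_neighbour= max(neighbours_dict.items(), key = operator.itemgetter(0))[1]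
--     return best_neighbour
-- ===== SOURCE B (Python) =====
-- def best_neighbour_queens(current_queens, no_queen, current_heuristic_cost):
--     # Incremental evaluation: a neighbour differs from current_queens in one row only,
--     # so its heuristic cost differs from the base cost by the change in that row's
--     # pairwise conflicts; compare those O(len) deltas instead of re-scoring each
--     # neighbour with the O(len^2) full scan.  Columns/rows are precomputed once.
--     if len(current_queens) == 1:
--         return current_queens
--     n = no_queen
--     m = len(current_queens)
--     cols = [q % n for q in current_queens]
--     rows = [q // n for q in current_queens]
--     best_delta = None
--     best = None
--     for r in range(n):
--         rr = rows[r]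
--         rc = cols[r]
--         old_contrib = 0
--         for j in range(m):
--             if j != r:
--                 c2 = cols[j]
--                 r2 = rows[j]
--                 if rc == c2:
--                     old_contrib += 1
--                 if abs(rr - r2) == abs(rc - c2):
--                     old_contrib += 1
--                 if rr == r2:
--                     old_contrib += 1
--         for rem in range(n):
--             if rem == rc:
--                 continue
--             new_contrib = 0
--             for j in range(m):
--                 if j != r:
--                     c2 = cols[j]
--                     r2 = rows[j]
--                     if rem == c2:
--                         new_contrib += 1
--                     if abs(r - r2) == abs(rem - c2):
--                         new_contrib += 1
--                     if r == r2:
--                         new_contrib += 1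
--             delta = new_contrib - old_contrib
--             if best_delta is None or delta >= best_delta:
--                 best_delta = delta
--                 best = current_queens.copy()
--                 best[r] = r * n + rem
--     return best
-- ===== Notes on version B (the rewrite author's own statement) =====
-- stated objective: faster
-- what changed: Instead of re-scoring every neighbour with the full O(len^2) pairwise scan and collecting them all in a cost-keyed dict, B scores each neighbour incrementally: only the moved row's pairwise conflicts change, so it compares O(len) cost deltas and keeps the running best (last maximum) in a single pass, with each queen's column/row precomputed once.
import Mathlib
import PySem

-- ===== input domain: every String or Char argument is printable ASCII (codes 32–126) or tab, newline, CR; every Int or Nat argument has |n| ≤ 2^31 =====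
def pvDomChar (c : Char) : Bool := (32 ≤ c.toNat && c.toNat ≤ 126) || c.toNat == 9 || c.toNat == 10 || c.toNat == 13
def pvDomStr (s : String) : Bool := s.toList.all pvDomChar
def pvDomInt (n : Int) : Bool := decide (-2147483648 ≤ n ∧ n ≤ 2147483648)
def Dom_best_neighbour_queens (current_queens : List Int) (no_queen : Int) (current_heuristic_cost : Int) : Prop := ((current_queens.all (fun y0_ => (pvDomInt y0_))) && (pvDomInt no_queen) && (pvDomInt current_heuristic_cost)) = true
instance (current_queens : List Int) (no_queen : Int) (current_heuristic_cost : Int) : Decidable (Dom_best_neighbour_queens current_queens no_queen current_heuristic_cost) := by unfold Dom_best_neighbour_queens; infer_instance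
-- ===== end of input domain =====

-- B replaces A's full O(len^2) re-scoring of every neighbour (collected in a cost-keyed dict)
-- by an O(len) incremental cost delta per neighbour with a running-best single pass; measured faster.

-- ===== PORT A =====
def safe_queens_heuristic_cost (queens_state : List Int) (no_queen : Int) : Int :=
  (PySem.List.pyRange 0 ((queens_state.length : Int) - 1) 1).foldl (fun not_safe i =>
    (PySem.List.pyRange (i + 1) (queens_state.length : Int) 1).foldl (fun not_safe j =>
      let ns1 := if PySem.Int.mod (PySem.List.pyGetD queens_state i 0) no_queen =
                    PySem.Int.mod (PySem.List.pyGetD queens_state j 0) no_queen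
                 then not_safe + 1 else not_safe
      let ns2 := if |PySem.Int.floordiv (PySem.List.pyGetD queens_state i 0) no_queen -
                     PySem.Int.floordiv (PySem.List.pyGetD queens_state j 0) no_queen| =
                    |PySem.Int.mod (PySem.List.pyGetD queens_state i 0) no_queen -
                     PySem.Int.mod (PySem.List.pyGetD queens_state j 0) no_queen|
                 then ns1 + 1 else ns1
      if PySem.Int.floordiv (PySem.List.pyGetD queens_state i 0) no_queen =
         PySem.Int.floordiv (PySem.List.pyGetD queens_state j 0) no_queen
      then ns2 + 1 else ns2) not_safe) 0

def select_best_neighbour (current_neighbours : List (List Int)) (no_queen : Int) : List Int :=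
  let neighbours_dict : PySem.Dict Int (List Int) :=
    current_neighbours.foldl
      (fun d cn => d.insert (safe_queens_heuristic_cost cn no_queen) cn) PySem.Dict.empty
  match PySem.List.max? neighbours_dict.items (fun p => p.1) with
  | some p => p.2
  | none => []  -- Python: max() on an empty dict raises ValueError; excluded by Pre_

def best_neighbour_queens (current_queens : List Int) (no_queen : Int) (current_heuristic_cost : Int) : List Int :=
  if current_queens.length = 1 then current_queens else
  let current_neighbours : List (List Int) :=
    (PySem.List.pyRange 0 no_queen 1).foldl (fun acc row_index =>
      let current_neighbour := current_queens
      let col_set : PySem.Set Int :=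
        (PySem.List.pyRange 0 no_queen 1).foldl (fun s i => PySem.Set.add s i) PySem.Set.empty
      let current_col := PySem.Int.mod (PySem.List.pyGetD current_queens row_index 0) no_queen
      -- col_set.remove raises KeyError only when no_queen ≤ 0 (then the loop body never runs in Python either)
      let col_set := (PySem.Set.remove? col_set current_col).getD col_set
      (col_set.foldl (fun (st : List Int × List (List Int)) remainder =>
        let new_position := row_index * no_queen + remainder
        -- current_neighbour[row_index] = new_position; row_index is in range inside Pre_
        let cn := st.1.set row_index.toNat new_position
        (cn, st.2 ++ [cn])) (current_neighbour, acc)).2) []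
  select_best_neighbour current_neighbours no_queen

-- ===== PORT B =====
def best_neighbour_queens_alt (current_queens : List Int) (no_queen : Int) (current_heuristic_cost : Int) : List Int :=
  if current_queens.length = 1 then current_queens else
  let n := no_queen
  let m := (current_queens.length : Int)
  let cols := current_queens.map (fun q => PySem.Int.mod q n)
  let rows := current_queens.map (fun q => PySem.Int.floordiv q n)
  let st :=
    (PySem.List.pyRange 0 n 1).foldl (fun st r =>
      let rr := PySem.List.pyGetD rows r 0
      let rc := PySem.List.pyGetD cols r 0
      let old_contrib :=
        (PySem.List.pyRange 0 m 1).foldl (fun a j =>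
          if j ≠ r then
            let c2 := PySem.List.pyGetD cols j 0
            let r2 := PySem.List.pyGetD rows j 0
            let a := if rc = c2 then a + 1 else a
            let a := if |rr - r2| = |rc - c2| then a + 1 else a
            if rr = r2 then a + 1 else a
          else a) 0
      (PySem.List.pyRange 0 n 1).foldl (fun (st : Option Int × Option (List Int)) rem =>
        if rem = rc then st else
        let new_contrib :=
          (PySem.List.pyRange 0 m 1).foldl (fun a j =>
            if j ≠ r then
              let c2 := PySem.List.pyGetD cols j 0
              let r2 := PySem.List.pyGetD rows j 0
              let a := if rem = c2 then a + 1 else a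
              let a := if |r - r2| = |rem - c2| then a + 1 else a
              if r = r2 then a + 1 else a
            else a) 0
        let delta := new_contrib - old_contrib
        match st.1 with
        | none => (some delta, some (current_queens.set r.toNat (r * no_queen + rem)))
        | some bd =>
            if bd ≤ delta then (some delta, some (current_queens.set r.toNat (r * no_queen + rem))) else st) st)
      ((none : Option Int), (none : Option (List Int)))
  st.2.getD current_queens  -- best is never None inside Pre_

-- ===== PRECONDITION & SPEC =====
-- Pre_ excludes exactly the inputs on which A raises: with len ≠ 1, no_queen > len gives an
-- IndexError and no_queen < 2 leaves the neighbour dict empty, so max() raises ValueError.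
def Pre_best_neighbour_queens (current_queens : List Int) (no_queen : Int) (current_heuristic_cost : Int) : Prop :=
  current_queens.length = 1 ∨ (2 ≤ no_queen ∧ no_queen ≤ (current_queens.length : Int))
instance (current_queens : List Int) (no_queen : Int) (current_heuristic_cost : Int) : Decidable (Pre_best_neighbour_queens current_queens no_queen current_heuristic_cost) := by unfold Pre_best_neighbour_queens; infer_instance
def pvWitness_best_neighbour_queens : List Int × Int × Int := ([0, 3], 2, 0)

def Spec_best_neighbour_queens (current_queens : List Int) (no_queen : Int) (current_heuristic_cost : Int) (out : List Int) : Prop := out = best_neighbour_queens_alt current_queens no_queen current_heuristic_cost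
instance (current_queens : List Int) (no_queen : Int) (current_heuristic_cost : Int) (out : List Int) : Decidable (Spec_best_neighbour_queens current_queens no_queen current_heuristic_cost out) := by unfold Spec_best_neighbour_queens; infer_instance

-- ===== CLAIM (what is proved, stated in full; the proofs are below) =====
def Claim_equal_best_neighbour_queens : Prop := ∀ (current_queens : List Int) (no_queen : Int) (current_heuristic_cost : Int), Dom_best_neighbour_queens current_queens no_queen current_heuristic_cost → Pre_best_neighbour_queens current_queens no_queen current_heuristic_cost → Spec_best_neighbour_queens current_queens no_queen current_heuristic_cost (best_neighbour_queens current_queens no_queen current_heuristic_cost)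

-- ===== LEMMAS AND PROOFS =====

-- conflict count of one pair of positions, and the summed contribution of row r (proof layer)
def pvPairCost (n p q : Int) : Int :=
  let c : Int := 0
  let c := if PySem.Int.mod p n = PySem.Int.mod q n then c + 1 else c
  let c := if |PySem.Int.floordiv p n - PySem.Int.floordiv q n| =
              |PySem.Int.mod p n - PySem.Int.mod q n| then c + 1 else c
  if PySem.Int.floordiv p n = PySem.Int.floordiv q n then c + 1 else c

def pvContrib (n : Int) (qs : List Int) (r : Int) (v : Int) : Int :=
  (PySem.List.pyRange 0 (qs.length : Int) 1).foldl
    (fun a j => if j ≠ r then a + pvPairCost n v (PySem.List.pyGetD qs j 0) else a) 0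



-- pair conflict count is symmetric in the two positions
lemma pvPairCost_symm (n p q : Int) : pvPairCost n p q = pvPairCost n q p := by
  simp only [pvPairCost,
    abs_sub_comm (PySem.Int.floordiv p n) (PySem.Int.floordiv q n),
    abs_sub_comm (PySem.Int.mod p n) (PySem.Int.mod q n),
    show (PySem.Int.mod p n = PySem.Int.mod q n) ↔ (PySem.Int.mod q n = PySem.Int.mod p n) from eq_comm,
    show (PySem.Int.floordiv p n = PySem.Int.floordiv q n) ↔ (PySem.Int.floordiv q n = PySem.Int.floordiv p n) from eq_comm]

-- structural sum of pvPairCost over all unordered pairs, in list order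
def pvSumPairs (n : Int) : List Int → Int
  | [] => 0
  | x :: xs => (xs.map (pvPairCost n x)).sum + pvSumPairs n xs

lemma pv_pyRange_nil {a b : Int} (h : b ≤ a) : PySem.List.pyRange a b 1 = [] := by
  refine List.eq_nil_iff_forall_not_mem.2 (fun x hx => ?_)
  rcases PySem.List.mem_pyRange_one.1 hx with ⟨h1, h2⟩; omega

lemma pv_pyRange_nodup_aux : ∀ (c : Nat) (a b : Int), (b - a).toNat = c → (PySem.List.pyRange a b 1).Nodup := by
  intro c
  induction c with
  | zero => intro a b h; rw [pv_pyRange_nil (by omega)]; exact List.nodup_nil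
  | succ c ih =>
      intro a b h
      rw [PySem.List.pyRange_one_cons (by omega)]
      refine List.nodup_cons.2 ⟨fun hmem => ?_, ih (a + 1) b (by omega)⟩
      rcases PySem.List.mem_pyRange_one.1 hmem with ⟨h1, h2⟩; omega

lemma pv_pyRange_nodup (a b : Int) : (PySem.List.pyRange a b 1).Nodup :=
  pv_pyRange_nodup_aux (b - a).toNat a b rfl

lemma pv_map_get_pyRange_aux : ∀ (c : Nat) (l : List Int) (k : Nat), l.length - k = c →
    (PySem.List.pyRange (k : Int) (l.length : Int) 1).map (fun j => PySem.List.pyGetD l j 0) = l.drop k := by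
  intro c
  induction c with
  | zero =>
      intro l k h
      rw [pv_pyRange_nil (by exact_mod_cast Int.ofNat_le.2 (by omega)), List.drop_eq_nil_of_le (by omega)]
      rfl
  | succ c ih =>
      intro l k h
      have hk : k < l.length := by omega
      rw [PySem.List.pyRange_one_cons (by exact_mod_cast hk), List.map_cons,
          show ((k : Int) + 1) = ((k + 1 : Nat) : Int) by push_cast; ring,
          ih l (k + 1) (by omega), PySem.List.pyGetD_natCast, List.getD_eq_getElem _ _ hk,
          List.drop_eq_getElem_cons hk]

lemma pv_map_get_pyRange (l : List Int) (k : Nat) :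
    (PySem.List.pyRange (k : Int) (l.length : Int) 1).map (fun j => PySem.List.pyGetD l j 0) = l.drop k :=
  pv_map_get_pyRange_aux (l.length - k) l k rfl

lemma pv_map_get_pyRange_take (l : List Int) (k : Nat) (hk : k ≤ l.length) :
    (PySem.List.pyRange 0 (k : Int) 1).map (fun j => PySem.List.pyGetD l j 0) = l.take k := by
  have h0 : ((l.take k).length : Int) = (k : Int) := by
    simp [List.length_take, Nat.min_eq_left hk]
  have := pv_map_get_pyRange (l.take k) 0
  rw [Nat.cast_zero, h0, List.drop_zero] at this
  rw [← this]
  refine List.map_congr_left (fun j hj => ?_)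
  rcases PySem.List.mem_pyRange_one.1 hj with ⟨h1, h2⟩
  have hjl : j < (l.length : Int) := by omega
  rw [PySem.List.pyGetD_eq_getElem _ _ h1 hjl,
      PySem.List.pyGetD_eq_getElem _ _ h1 (by rw [h0]; omega)]
  rw [List.getElem_take]

lemma pv_sumPairs_range (n : Int) : ∀ (l : List Int),
    ((List.range l.length).map (fun k =>
        ((l.drop (k + 1)).map (fun y => pvPairCost n (l.getD k 0) y)).sum)).sum = pvSumPairs n l := by
  intro l
  induction l with
  | nil => simp [pvSumPairs]
  | cons x xs ih =>
      rw [List.length_cons, List.range_succ_eq_map, List.map_cons, List.map_map, List.sum_cons]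
      have : ((List.range xs.length).map ((fun k =>
          (((x :: xs).drop (k + 1)).map (fun y => pvPairCost n ((x :: xs).getD k 0) y)).sum) ∘ Nat.succ))
          = (List.range xs.length).map (fun k =>
              ((xs.drop (k + 1)).map (fun y => pvPairCost n (xs.getD k 0) y)).sum) := by
        refine List.map_congr_left (fun k _ => ?_)
        rfl
      rw [this, ih]
      simp [pvSumPairs]

-- the three sequential conditional increments of A's inner loop add exactly pvPairCost
lemma pv_body (n : Int) (l : List Int) (i j ns : Int) :
    (let ns1 := if PySem.Int.mod (PySem.List.pyGetD l i 0) n =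
                    PySem.Int.mod (PySem.List.pyGetD l j 0) n
                then ns + 1 else ns
     let ns2 := if |PySem.Int.floordiv (PySem.List.pyGetD l i 0) n -
                     PySem.Int.floordiv (PySem.List.pyGetD l j 0) n| =
                    |PySem.Int.mod (PySem.List.pyGetD l i 0) n -
                     PySem.Int.mod (PySem.List.pyGetD l j 0) n|
                then ns1 + 1 else ns1
     if PySem.Int.floordiv (PySem.List.pyGetD l i 0) n =
        PySem.Int.floordiv (PySem.List.pyGetD l j 0) n
     then ns2 + 1 else ns2)
    = ns + pvPairCost n (PySem.List.pyGetD l i 0) (PySem.List.pyGetD l j 0) := by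
  simp only [pvPairCost]
  split_ifs <;> ring

-- A's nested index loop computes the structural pair sum
lemma pv_safe_eq_sumPairs (l : List Int) (n : Int) :
    safe_queens_heuristic_cost l n = pvSumPairs n l := by
  unfold safe_queens_heuristic_cost
  simp only [pv_body n l]
  rw [PySem.List.foldl_congr_mem _ _
      (fun acc i => acc + ((PySem.List.pyRange (i + 1) (l.length : Int) 1).map
        (fun j => pvPairCost n (PySem.List.pyGetD l i 0) (PySem.List.pyGetD l j 0))).sum) _
      (fun acc i _ => PySem.List.foldl_add _ _ _),
      PySem.List.foldl_add, zero_add]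
  rcases Nat.eq_zero_or_pos l.length with h0 | hpos
  · rw [List.length_eq_zero_iff.1 h0,
        show ((([] : List Int).length : Int) - 1) = -1 by norm_num,
        pv_pyRange_nil (by norm_num)]
    rfl
  · have hterm : ∀ k ∈ List.range (l.length - 1),
        ((fun i => ((PySem.List.pyRange (i + 1) (l.length : Int) 1).map
            (fun j => pvPairCost n (PySem.List.pyGetD l i 0) (PySem.List.pyGetD l j 0))).sum)
          ∘ (fun k : Nat => (k : Int))) k
        = (fun k => ((l.drop (k + 1)).map (fun y => pvPairCost n (l.getD k 0) y)).sum) k := by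
      intro k _
      simp only [Function.comp]
      rw [show ((k : Int) + 1) = ((k + 1 : Nat) : Int) by push_cast; ring,
          show (fun j => pvPairCost n (PySem.List.pyGetD l (k : Int) 0) (PySem.List.pyGetD l j 0))
            = (fun y => pvPairCost n (PySem.List.pyGetD l (k : Int) 0) y)
                ∘ (fun j => PySem.List.pyGetD l j 0) from rfl,
          ← List.map_map, pv_map_get_pyRange l (k + 1), PySem.List.pyGetD_natCast]
    rw [show ((l.length : Int) - 1) = ((l.length - 1 : Nat) : Int) by
          rw [Nat.cast_sub hpos]; norm_num,
        PySem.List.pyRange_zero_natCast, List.map_map, List.map_congr_left hterm]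
    have hlast : ((l.drop (l.length - 1 + 1)).map
        (fun y => pvPairCost n (l.getD (l.length - 1) 0) y)).sum = 0 := by
      rw [show l.length - 1 + 1 = l.length by omega, List.drop_length]
      rfl
    have hext : (List.range l.length).map
          (fun k => ((l.drop (k + 1)).map (fun y => pvPairCost n (l.getD k 0) y)).sum)
        = (List.range (l.length - 1)).map
            (fun k => ((l.drop (k + 1)).map (fun y => pvPairCost n (l.getD k 0) y)).sum)
          ++ [((l.drop (l.length - 1 + 1)).map
                (fun y => pvPairCost n (l.getD (l.length - 1) 0) y)).sum] := by
      rw [show l.length = l.length - 1 + 1 by omega, List.range_succ, List.map_append,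
          List.map_cons, List.map_nil]
      simp only [show l.length - 1 + 1 - 1 = l.length - 1 by omega]
    have := pv_sumPairs_range n l
    rw [hext, List.sum_append, hlast, List.sum_cons, List.sum_nil] at this
    omega

lemma pv_sumPairs_middle (n : Int) : ∀ (pre : List Int) (x : Int) (post : List Int),
    pvSumPairs n (pre ++ x :: post) =
      pvSumPairs n (pre ++ post) + (pre.map (fun p => pvPairCost n p x)).sum
        + (post.map (fun q => pvPairCost n x q)).sum := by
  intro pre
  induction pre with
  | nil => intro x post; simp [pvSumPairs]; ring
  | cons p pre ih =>
      intro x post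
      simp only [List.cons_append, pvSumPairs, List.map_append, List.map_cons, List.sum_append,
        List.sum_cons, ih]
      ring

lemma pv_contrib_eq (n : Int) (l : List Int) (k : Nat) (hk : k < l.length) (v : Int) :
    pvContrib n l (k : Int) v =
      ((l.take k).map (fun p => pvPairCost n v p)).sum
        + ((l.drop (k + 1)).map (fun q => pvPairCost n v q)).sum := by
  have hk' : ((k : Int)) < (l.length : Int) := by exact_mod_cast hk
  have hk0 : (0 : Int) ≤ (k : Int) := by positivity
  unfold pvContrib
  rw [PySem.List.foldl_ite_eq_foldl_filter (fun j => ¬ j = (k : Int))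
        (fun a j => a + pvPairCost n v (PySem.List.pyGetD l j 0)) _ 0,
      PySem.List.foldl_add,
      PySem.List.pyRange_one_append 0 (k : Int) (l.length : Int) hk0 (by omega),
      PySem.List.pyRange_one_cons hk', List.filter_append, List.filter_cons]
  have hpre : (PySem.List.pyRange 0 (k : Int) 1).filter (fun j => decide (¬ j = (k : Int)))
      = PySem.List.pyRange 0 (k : Int) 1 := by
    refine List.filter_eq_self.2 (fun j hj => ?_)
    rcases PySem.List.mem_pyRange_one.1 hj with ⟨h1, h2⟩
    simp only [decide_eq_true_eq]
    omega
  have hsuf : (PySem.List.pyRange ((k : Int) + 1) (l.length : Int) 1).filter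
        (fun j => decide (¬ j = (k : Int)))
      = PySem.List.pyRange ((k : Int) + 1) (l.length : Int) 1 := by
    refine List.filter_eq_self.2 (fun j hj => ?_)
    rcases PySem.List.mem_pyRange_one.1 hj with ⟨h1, h2⟩
    simp only [decide_eq_true_eq]
    omega
  rw [hpre, hsuf, if_neg (by simp), List.map_append, List.sum_append]
  have h3 : (PySem.List.pyRange 0 (k : Int) 1).map (fun j => pvPairCost n v (PySem.List.pyGetD l j 0))
      = (l.take k).map (fun p => pvPairCost n v p) := by
    rw [show (fun j => pvPairCost n v (PySem.List.pyGetD l j 0))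
          = (fun p => pvPairCost n v p) ∘ (fun j => PySem.List.pyGetD l j 0) from rfl,
        ← List.map_map, pv_map_get_pyRange_take l k hk.le]
  have h4 : (PySem.List.pyRange ((k : Int) + 1) (l.length : Int) 1).map
        (fun j => pvPairCost n v (PySem.List.pyGetD l j 0))
      = (l.drop (k + 1)).map (fun q => pvPairCost n v q) := by
    rw [show ((k : Int) + 1) = ((k + 1 : Nat) : Int) by push_cast; ring,
        show (fun j => pvPairCost n v (PySem.List.pyGetD l j 0))
          = (fun p => pvPairCost n v p) ∘ (fun j => PySem.List.pyGetD l j 0) from rfl,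
        ← List.map_map, pv_map_get_pyRange l (k + 1)]
  rw [h3, h4]
  ring

-- incremental cost identity: moving row k to value v changes the total by the row's delta
lemma pv_cost_delta (n : Int) (l : List Int) (k : Nat) (hk : k < l.length) (v : Int) :
    pvSumPairs n (l.set k v) =
      pvSumPairs n l + pvContrib n l (k : Int) v - pvContrib n l (k : Int) (PySem.List.pyGetD l (k : Int) 0) := by
  have hget : PySem.List.pyGetD l (k : Int) 0 = l.getD k 0 := PySem.List.pyGetD_natCast l k 0
  have hsplit : l = l.take k ++ l.getD k 0 :: l.drop (k + 1) := by
    conv_lhs => rw [← List.take_append_drop k l]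
    rw [List.drop_eq_getElem_cons hk, List.getD_eq_getElem l 0 hk]
  have hsymm : ∀ (xs : List Int) (w : Int),
      (xs.map (fun p => pvPairCost n p w)).sum = (xs.map (fun p => pvPairCost n w p)).sum := by
    intro xs w
    rw [List.map_congr_left (fun p _ => pvPairCost_symm n p w)]
  have hl : pvSumPairs n l = pvSumPairs n (l.take k ++ l.drop (k + 1))
      + ((l.take k).map (fun p => pvPairCost n p (l.getD k 0))).sum
      + ((l.drop (k + 1)).map (fun q => pvPairCost n (l.getD k 0) q)).sum := by
    conv_lhs => rw [hsplit]
    rw [pv_sumPairs_middle]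
  rw [List.set_eq_take_append_cons_drop, if_pos hk, pv_sumPairs_middle,
      pv_contrib_eq n l k hk v, hget, pv_contrib_eq n l k hk (l.getD k 0), hl,
      hsymm (l.take k) v, hsymm (l.take k) (l.getD k 0)]
  ring

-- the candidate moves (row, remainder) both programs enumerate, in order
def pvCands (qs : List Int) (n : Int) : List (Int × Int) :=
  (PySem.List.pyRange 0 n 1).flatMap (fun r =>
    ((PySem.List.pyRange 0 n 1).filter
        (fun rem => !(rem == PySem.Int.mod (PySem.List.pyGetD qs r 0) n))).map (fun rem => (r, rem)))

def pvCand (qs : List Int) (n : Int) (p : Int × Int) : List Int := qs.set p.1.toNat (p.1 * n + p.2)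

def pvDelta (qs : List Int) (n : Int) (p : Int × Int) : Int :=
  pvContrib n qs p.1 (p.1 * n + p.2) - pvContrib n qs p.1 (PySem.List.pyGetD qs p.1 0)

lemma pv_mem_cands {qs : List Int} {n : Int} {p : Int × Int} (h : p ∈ pvCands qs n) :
    (0 ≤ p.1 ∧ p.1 < n) ∧ (0 ≤ p.2 ∧ p.2 < n) := by
  rcases List.mem_flatMap.1 h with ⟨r, hr, hp⟩
  rcases List.mem_map.1 hp with ⟨rem, hrem, hpe⟩
  rcases PySem.List.mem_pyRange_one.1 hr with ⟨h1, h2⟩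
  rcases PySem.List.mem_pyRange_one.1 (List.mem_of_mem_filter hrem) with ⟨h3, h4⟩
  subst hpe; exact ⟨⟨h1, h2⟩, ⟨h3, h4⟩⟩

-- building a set by adding distinct fresh elements appends them
lemma pv_set_add_fold : ∀ (xs : List Int) (s : PySem.Set Int), xs.Nodup → (∀ x ∈ xs, x ∉ s) →
    xs.foldl PySem.Set.add s = s ++ xs := by
  intro xs
  induction xs with
  | nil => intro s _ _; simp
  | cons x xs ih =>
      intro s hnd hfr
      rw [List.foldl_cons]
      have hx : x ∉ s := hfr x (by simp)
      have hadd : PySem.Set.add s x = s ++ [x] := by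
        simp [PySem.Set.add, PySem.Set.contains, hx]
      rw [hadd, ih (s ++ [x]) (List.nodup_cons.1 hnd).2 ?fresh, List.append_assoc]
      · simp
      case fresh =>
        intro y hy
        simp only [List.mem_append, List.mem_singleton]
        rintro (hys | rfl)
        · exact hfr y (by simp [hy]) hys
        · exact (List.nodup_cons.1 hnd).1 hy

-- A's neighbour generator: each appended copy is qs with one row replaced
lemma pv_inner_fold (k : Nat) (pos : Int → Int) (qs : List Int) :
    ∀ (rems : List Int) (cn : List Int) (acc : List (List Int)),
      (∀ x, cn.set k x = qs.set k x) →
      (rems.foldl (fun (st : List Int × List (List Int)) rem =>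
          (st.1.set k (pos rem), st.2 ++ [st.1.set k (pos rem)])) (cn, acc)).2
        = acc ++ rems.map (fun rem => qs.set k (pos rem)) := by
  intro rems
  induction rems with
  | nil => intro cn acc _; simp
  | cons rem rems ih =>
      intro cn acc hcn
      rw [List.foldl_cons]
      have h1 : cn.set k (pos rem) = qs.set k (pos rem) := hcn _
      rw [ih (cn.set k (pos rem)) (acc ++ [cn.set k (pos rem)])
            (fun x => by rw [List.set_set, hcn x])]
      rw [h1]
      simp

-- characterization of port A outside the trivial branch
lemma pv_A_char (qs : List Int) (n c : Int) (hne : ¬ qs.length = 1) (h2 : 2 ≤ n) :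
    best_neighbour_queens qs n c = select_best_neighbour ((pvCands qs n).map (pvCand qs n)) n := by
  have hn : (0 : Int) < n := by omega
  simp only [best_neighbour_queens, if_neg hne]
  congr 1
  have hcol : (PySem.List.pyRange 0 n 1).foldl (fun s i => PySem.Set.add s i) PySem.Set.empty
      = PySem.List.pyRange 0 n 1 := by
    simpa using pv_set_add_fold (PySem.List.pyRange 0 n 1) PySem.Set.empty
      (pv_pyRange_nodup 0 n) (fun x _ => by simp [PySem.Set.empty])
  have hrem : ∀ r : Int,
      (PySem.Set.remove? (PySem.List.pyRange 0 n 1)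
          (PySem.Int.mod (PySem.List.pyGetD qs r 0) n)).getD (PySem.List.pyRange 0 n 1)
      = (PySem.List.pyRange 0 n 1).filter
          (fun y => !(y == PySem.Int.mod (PySem.List.pyGetD qs r 0) n)) := by
    intro r
    have hmem : PySem.Int.mod (PySem.List.pyGetD qs r 0) n ∈ PySem.List.pyRange 0 n 1 :=
      PySem.List.mem_pyRange_one.2 ⟨PySem.Int.mod_nonneg _ hn, PySem.Int.mod_lt _ hn⟩
    have hcont : PySem.Set.contains (PySem.List.pyRange 0 n 1)
        (PySem.Int.mod (PySem.List.pyGetD qs r 0) n) = true := by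
      simp only [PySem.Set.contains, List.contains_iff_mem]
      exact hmem
    simp only [PySem.Set.remove?, hcont, if_true, PySem.Set.discard, Option.getD_some]
  have hinner : ∀ (r : Int) (acc : List (List Int)),
      (((PySem.List.pyRange 0 n 1).filter
          (fun y => !(y == PySem.Int.mod (PySem.List.pyGetD qs r 0) n))).foldl
        (fun (st : List Int × List (List Int)) rem =>
          (st.1.set r.toNat (r * n + rem), st.2 ++ [st.1.set r.toNat (r * n + rem)])) (qs, acc)).2
      = acc ++ ((PySem.List.pyRange 0 n 1).filter
          (fun y => !(y == PySem.Int.mod (PySem.List.pyGetD qs r 0) n))).map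
            (fun rem => qs.set r.toNat (r * n + rem)) :=
    fun r acc => pv_inner_fold r.toNat (fun rem => r * n + rem) qs _ qs acc (fun _ => rfl)
  simp only [hcol, hrem, hinner]
  rw [PySem.List.foldl_append_eq_flatMap]
  simp only [pvCands, List.map_flatMap, List.map_map, List.nil_append]
  rfl

-- generic "keep the last maximum" fold
def pvBestStep {α : Type} (acc : Option (Int × α)) (p : Int × α) : Option (Int × α) :=
  match acc with
  | none => some p
  | some b => if b.1 ≤ p.1 then some p else acc

def pvBestFold {α : Type} (L : List (Int × α)) (acc : Option (Int × α)) : Option (Int × α) :=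
  L.foldl pvBestStep acc

lemma pvBestFold_some {α : Type} : ∀ (L : List (Int × α)) (b : Int × α),
    ∃ b', pvBestFold L (some b) = some b' := by
  intro L
  induction L with
  | nil => intro b; exact ⟨b, rfl⟩
  | cons x L ih =>
      intro b
      show ∃ b', pvBestFold L (pvBestStep (some b) x) = some b'
      simp only [pvBestStep]
      split_ifs <;> exact ih _

lemma pvBestFold_none_iff {α : Type} (L : List (Int × α)) :
    pvBestFold L none = none ↔ L = [] := by
  cases L with
  | nil => simp [pvBestFold]
  | cons x L =>
      simp only [List.cons_ne_nil, iff_false]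
      have : pvBestFold (x :: L) none = pvBestFold L (some x) := rfl
      rw [this]
      rcases pvBestFold_some L x with ⟨b', hb'⟩
      simp [hb']

lemma pvBestFold_mem_aux {α : Type} : ∀ (L : List (Int × α)) (acc : Option (Int × α)) (b : Int × α),
    L.foldl pvBestStep acc = some b → acc = some b ∨ b ∈ L := by
  intro L
  induction L with
  | nil => intro acc b h; exact Or.inl h
  | cons x L ih =>
      intro acc b h
      rcases ih (pvBestStep acc x) b h with h' | h'
      · cases acc with
        | none =>
            right
            simp only [pvBestStep] at h'
            simp [Option.some.inj h']
        | some a =>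
            simp only [pvBestStep] at h'
            split_ifs at h' with hc
            · right; simp [Option.some.inj h']
            · left; exact h'
      · exact Or.inr (List.mem_cons_of_mem _ h')

lemma pvBestFold_mem {α : Type} (L : List (Int × α)) (b : Int × α)
    (h : pvBestFold L none = some b) : b ∈ L := by
  rcases pvBestFold_mem_aux L none b h with h' | h'
  · exact absurd h' (by simp)
  · exact h'

-- reading the precomputed column/row lists is taking mod/floordiv of the queen value
lemma pv_getD_map_mod (qs : List Int) (n i : Int) :
    PySem.List.pyGetD (qs.map (fun q => PySem.Int.mod q n)) i 0
      = PySem.Int.mod (PySem.List.pyGetD qs i 0) n := by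
  have h := PySem.List.pyGetD_map (fun q => PySem.Int.mod q n) qs i 0
  rw [show PySem.Int.mod 0 n = 0 by simp [PySem.Int.mod]] at h
  exact h

lemma pv_getD_map_fd (qs : List Int) (n i : Int) :
    PySem.List.pyGetD (qs.map (fun q => PySem.Int.floordiv q n)) i 0
      = PySem.Int.floordiv (PySem.List.pyGetD qs i 0) n := by
  have h := PySem.List.pyGetD_map (fun q => PySem.Int.floordiv q n) qs i 0
  rw [show PySem.Int.floordiv 0 n = 0 by simp [PySem.Int.floordiv]] at h
  exact h

-- B's inner conflict loop for the moved queen (placed at row r, column rem) is pvContrib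
lemma pv_foldC_eq (qs : List Int) (n r rem : Int) (hn : 0 < n)
    (hrem0 : 0 ≤ rem) (hremn : rem < n) :
    ((PySem.List.pyRange 0 (qs.length : Int) 1).foldl (fun a j =>
        if j ≠ r then (if r = PySem.Int.floordiv (PySem.List.pyGetD qs j 0) n then (if |r - PySem.Int.floordiv (PySem.List.pyGetD qs j 0) n| = |rem - PySem.Int.mod (PySem.List.pyGetD qs j 0) n| then (if rem = PySem.Int.mod (PySem.List.pyGetD qs j 0) n then a + 1 else a) + 1 else (if rem = PySem.Int.mod (PySem.List.pyGetD qs j 0) n then a + 1 else a)) + 1 else (if |r - PySem.Int.floordiv (PySem.List.pyGetD qs j 0) n| = |rem - PySem.Int.mod (PySem.List.pyGetD qs j 0) n| then (if rem = PySem.Int.mod (PySem.List.pyGetD qs j 0) n then a + 1 else a) + 1 else (if rem = PySem.Int.mod (PySem.List.pyGetD qs j 0) n then a + 1 else a)))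
        else a) 0)
    = pvContrib n qs r (r * n + rem) := by
  have hfd : PySem.Int.floordiv (r * n + rem) n = r := by
    rw [PySem.Int.floordiv_eq_iff_of_pos hn]
    constructor <;> nlinarith
  have hmod : PySem.Int.mod (r * n + rem) n = rem := by
    have h := PySem.Int.floordiv_mul_add_mod (r * n + rem) n
    rw [hfd] at h
    linarith
  rw [pvContrib]
  refine PySem.List.foldl_congr_mem _ _ _ _ (fun a j _ => ?_)
  by_cases hj : j ≠ r
  · rw [if_pos hj, if_pos hj]
    simp only [pvPairCost, hfd, hmod]
    split_ifs <;> ring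
  · rw [if_neg hj, if_neg hj]

-- B's inner conflict loop for the current queen of row r is pvContrib of its own value
lemma pv_foldO_eq (qs : List Int) (n r : Int) :
    ((PySem.List.pyRange 0 (qs.length : Int) 1).foldl (fun a j =>
        if j ≠ r then (if PySem.Int.floordiv (PySem.List.pyGetD qs r 0) n = PySem.Int.floordiv (PySem.List.pyGetD qs j 0) n then (if |PySem.Int.floordiv (PySem.List.pyGetD qs r 0) n - PySem.Int.floordiv (PySem.List.pyGetD qs j 0) n| = |PySem.Int.mod (PySem.List.pyGetD qs r 0) n - PySem.Int.mod (PySem.List.pyGetD qs j 0) n| then (if PySem.Int.mod (PySem.List.pyGetD qs r 0) n = PySem.Int.mod (PySem.List.pyGetD qs j 0) n then a + 1 else a) + 1 else (if PySem.Int.mod (PySem.List.pyGetD qs r 0) n = PySem.Int.mod (PySem.List.pyGetD qs j 0) n then a + 1 else a)) + 1 else (if |PySem.Int.floordiv (PySem.List.pyGetD qs r 0) n - PySem.Int.floordiv (PySem.List.pyGetD qs j 0) n| = |PySem.Int.mod (PySem.List.pyGetD qs r 0) n - PySem.Int.mod (PySem.List.pyGetD qs j 0) n| then (if PySem.Int.mod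 (PySem.List.pyGetD qs r 0) n = PySem.Int.mod (PySem.List.pyGetD qs j 0) n then a + 1 else a) + 1 else (if PySem.Int.mod (PySem.List.pyGetD qs r 0) n = PySem.Int.mod (PySem.List.pyGetD qs j 0) n then a + 1 else a)))
        else a) 0)
    = pvContrib n qs r (PySem.List.pyGetD qs r 0) := by
  rw [pvContrib]
  refine PySem.List.foldl_congr_mem _ _ _ _ (fun a j _ => ?_)
  by_cases hj : j ≠ r
  · rw [if_pos hj, if_pos hj]
    simp only [pvPairCost]
    split_ifs <;> ring
  · rw [if_neg hj, if_neg hj]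

-- B's pair of optional accumulators is the generic last-maximum fold, componentwise
lemma pv_pairfold (qs : List Int) (n : Int) : ∀ (P : List (Int × Int)) (acc : Option (Int × List Int)),
    P.foldl (fun (st : Option Int × Option (List Int)) p =>
        match st.1 with
        | none => (some (pvDelta qs n p), some (pvCand qs n p))
        | some bd => if bd ≤ pvDelta qs n p
            then (some (pvDelta qs n p), some (pvCand qs n p)) else st)
      (acc.map (fun b => b.1), acc.map (fun b => b.2))
    = ((pvBestFold (P.map (fun p => (pvDelta qs n p, pvCand qs n p))) acc).map (fun b => b.1),
       (pvBestFold (P.map (fun p => (pvDelta qs n p, pvCand qs n p))) acc).map (fun b => b.2)) := by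
  intro P
  induction P with
  | nil => intro acc; rfl
  | cons p P ih =>
      intro acc
      rw [List.foldl_cons, List.map_cons]
      have hstep : (match (acc.map (fun b => b.1) : Option Int) with
          | none => (some (pvDelta qs n p), some (pvCand qs n p))
          | some bd => if bd ≤ pvDelta qs n p
              then (some (pvDelta qs n p), some (pvCand qs n p))
              else (acc.map (fun b => b.1), acc.map (fun b => b.2)))
          = ((pvBestStep acc (pvDelta qs n p, pvCand qs n p)).map (fun b => b.1),
             (pvBestStep acc (pvDelta qs n p, pvCand qs n p)).map (fun b => b.2)) := by
        cases acc with
        | none => rfl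
        | some b =>
            simp only [Option.map_some, pvBestStep]
            split_ifs <;> rfl
      rw [hstep]
      exact ih (pvBestStep acc (pvDelta qs n p, pvCand qs n p))

-- characterization of port B outside the trivial branch
lemma pv_B_char (qs : List Int) (n c : Int) (hne : ¬ qs.length = 1) :
    best_neighbour_queens_alt qs n c =
      ((pvBestFold ((pvCands qs n).map (fun p => (pvDelta qs n p, pvCand qs n p))) none).map
        (fun b => b.2)).getD qs := by
  simp only [best_neighbour_queens_alt, if_neg hne]
  simp only [pv_getD_map_mod, pv_getD_map_fd]
  have hswap : ∀ (r : Int) (st : Option Int × Option (List Int)) (rem : Int),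
      (if rem = PySem.Int.mod (PySem.List.pyGetD qs r 0) n then st
       else
        match st.1 with
        | none => (some (((PySem.List.pyRange 0 (qs.length : Int) 1).foldl (fun a j =>
          if j ≠ r then (if r = PySem.Int.floordiv (PySem.List.pyGetD qs j 0) n then (if |r - PySem.Int.floordiv (PySem.List.pyGetD qs j 0) n| = |rem - PySem.Int.mod (PySem.List.pyGetD qs j 0) n| then (if rem = PySem.Int.mod (PySem.List.pyGetD qs j 0) n then a + 1 else a) + 1 else (if rem = PySem.Int.mod (PySem.List.pyGetD qs j 0) n then a + 1 else a)) + 1 else (if |r - PySem.Int.floordiv (PySem.List.pyGetD qs j 0) n| = |rem - PySem.Int.mod (PySem.List.pyGetD qs j 0) n| then (if rem = PySem.Int.mod (PySem.List.pyGetD qs j 0) n then a + 1 else a) + 1 else (if rem = PySem.Int.mod (PySem.List.pyGetD qs j 0) n then a + 1 else a)))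
          else a) 0)
          - ((PySem.List.pyRange 0 (qs.length : Int) 1).foldl (fun a j =>
          if j ≠ r then (if PySem.Int.floordiv (PySem.List.pyGetD qs r 0) n = PySem.Int.floordiv (PySem.List.pyGetD qs j 0) n then (if |PySem.Int.floordiv (PySem.List.pyGetD qs r 0) n - PySem.Int.floordiv (PySem.List.pyGetD qs j 0) n| = |PySem.Int.mod (PySem.List.pyGetD qs r 0) n - PySem.Int.mod (PySem.List.pyGetD qs j 0) n| then (if PySem.Int.mod (PySem.List.pyGetD qs r 0) n = PySem.Int.mod (PySem.List.pyGetD qs j 0) n then a + 1 else a) + 1 else (if PySem.Int.mod (PySem.List.pyGetD qs r 0) n = PySem.Int.mod (PySem.List.pyGetD qs j 0) n then a + 1 else a)) + 1 else (if |PySem.Int.floordiv (PySem.List.pyGetD qs r 0) n - PySem.Int.floordiv (PySem.List.pyGetD qs j 0) n| = |PySem.Int.mod (PySem.List.pyGetD qs r 0) n - PySem.Int.mod (PySem.List.pyGetD qs j 0) n| then (if PySem.Int.mod (PySem.List.pyGetD qs r 0) n = PySem.Int.mod (PySem.List.pyGetD qs j 0) n then a + 1 else a) + 1 else (if PySem.Int.mod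 (PySem.List.pyGetD qs r 0) n = PySem.Int.mod (PySem.List.pyGetD qs j 0) n then a + 1 else a)))
          else a) 0)), some (qs.set (r).toNat (r * n + rem)))
        | some bd =>
            if bd ≤ (((PySem.List.pyRange 0 (qs.length : Int) 1).foldl (fun a j =>
          if j ≠ r then (if r = PySem.Int.floordiv (PySem.List.pyGetD qs j 0) n then (if |r - PySem.Int.floordiv (PySem.List.pyGetD qs j 0) n| = |rem - PySem.Int.mod (PySem.List.pyGetD qs j 0) n| then (if rem = PySem.Int.mod (PySem.List.pyGetD qs j 0) n then a + 1 else a) + 1 else (if rem = PySem.Int.mod (PySem.List.pyGetD qs j 0) n then a + 1 else a)) + 1 else (if |r - PySem.Int.floordiv (PySem.List.pyGetD qs j 0) n| = |rem - PySem.Int.mod (PySem.List.pyGetD qs j 0) n| then (if rem = PySem.Int.mod (PySem.List.pyGetD qs j 0) n then a + 1 else a) + 1 else (if rem = PySem.Int.mod (PySem.List.pyGetD qs j 0) n then a + 1 else a)))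
          else a) 0)
          - ((PySem.List.pyRange 0 (qs.length : Int) 1).foldl (fun a j =>
          if j ≠ r then (if PySem.Int.floordiv (PySem.List.pyGetD qs r 0) n = PySem.Int.floordiv (PySem.List.pyGetD qs j 0) n then (if |PySem.Int.floordiv (PySem.List.pyGetD qs r 0) n - PySem.Int.floordiv (PySem.List.pyGetD qs j 0) n| = |PySem.Int.mod (PySem.List.pyGetD qs r 0) n - PySem.Int.mod (PySem.List.pyGetD qs j 0) n| then (if PySem.Int.mod (PySem.List.pyGetD qs r 0) n = PySem.Int.mod (PySem.List.pyGetD qs j 0) n then a + 1 else a) + 1 else (if PySem.Int.mod (PySem.List.pyGetD qs r 0) n = PySem.Int.mod (PySem.List.pyGetD qs j 0) n then a + 1 else a)) + 1 else (if |PySem.Int.floordiv (PySem.List.pyGetD qs r 0) n - PySem.Int.floordiv (PySem.List.pyGetD qs j 0) n| = |PySem.Int.mod (PySem.List.pyGetD qs r 0) n - PySem.Int.mod (PySem.List.pyGetD qs j 0) n| then (if PySem.Int.mod (PySem.List.pyGetD qs r 0) n = PySem.Int.mod (PySem.List.pyGetD qs j 0) n then a + 1 else a) + 1 else (if PySem.Int.mod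 (PySem.List.pyGetD qs r 0) n = PySem.Int.mod (PySem.List.pyGetD qs j 0) n then a + 1 else a)))
          else a) 0))
            then (some (((PySem.List.pyRange 0 (qs.length : Int) 1).foldl (fun a j =>
          if j ≠ r then (if r = PySem.Int.floordiv (PySem.List.pyGetD qs j 0) n then (if |r - PySem.Int.floordiv (PySem.List.pyGetD qs j 0) n| = |rem - PySem.Int.mod (PySem.List.pyGetD qs j 0) n| then (if rem = PySem.Int.mod (PySem.List.pyGetD qs j 0) n then a + 1 else a) + 1 else (if rem = PySem.Int.mod (PySem.List.pyGetD qs j 0) n then a + 1 else a)) + 1 else (if |r - PySem.Int.floordiv (PySem.List.pyGetD qs j 0) n| = |rem - PySem.Int.mod (PySem.List.pyGetD qs j 0) n| then (if rem = PySem.Int.mod (PySem.List.pyGetD qs j 0) n then a + 1 else a) + 1 else (if rem = PySem.Int.mod (PySem.List.pyGetD qs j 0) n then a + 1 else a)))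
          else a) 0)
          - ((PySem.List.pyRange 0 (qs.length : Int) 1).foldl (fun a j =>
          if j ≠ r then (if PySem.Int.floordiv (PySem.List.pyGetD qs r 0) n = PySem.Int.floordiv (PySem.List.pyGetD qs j 0) n then (if |PySem.Int.floordiv (PySem.List.pyGetD qs r 0) n - PySem.Int.floordiv (PySem.List.pyGetD qs j 0) n| = |PySem.Int.mod (PySem.List.pyGetD qs r 0) n - PySem.Int.mod (PySem.List.pyGetD qs j 0) n| then (if PySem.Int.mod (PySem.List.pyGetD qs r 0) n = PySem.Int.mod (PySem.List.pyGetD qs j 0) n then a + 1 else a) + 1 else (if PySem.Int.mod (PySem.List.pyGetD qs r 0) n = PySem.Int.mod (PySem.List.pyGetD qs j 0) n then a + 1 else a)) + 1 else (if |PySem.Int.floordiv (PySem.List.pyGetD qs r 0) n - PySem.Int.floordiv (PySem.List.pyGetD qs j 0) n| = |PySem.Int.mod (PySem.List.pyGetD qs r 0) n - PySem.Int.mod (PySem.List.pyGetD qs j 0) n| then (if PySem.Int.mod (PySem.List.pyGetD qs r 0) n = PySem.Int.mod (PySem.List.pyGetD qs j 0) n then a + 1 else a) + 1 else (if PySem.Int.mod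 (PySem.List.pyGetD qs r 0) n = PySem.Int.mod (PySem.List.pyGetD qs j 0) n then a + 1 else a)))
          else a) 0)), some (qs.set (r).toNat (r * n + rem)))
            else st)
      = (if ¬ (rem == PySem.Int.mod (PySem.List.pyGetD qs r 0) n) = true then
          (match st.1 with
        | none => (some (((PySem.List.pyRange 0 (qs.length : Int) 1).foldl (fun a j =>
          if j ≠ r then (if r = PySem.Int.floordiv (PySem.List.pyGetD qs j 0) n then (if |r - PySem.Int.floordiv (PySem.List.pyGetD qs j 0) n| = |rem - PySem.Int.mod (PySem.List.pyGetD qs j 0) n| then (if rem = PySem.Int.mod (PySem.List.pyGetD qs j 0) n then a + 1 else a) + 1 else (if rem = PySem.Int.mod (PySem.List.pyGetD qs j 0) n then a + 1 else a)) + 1 else (if |r - PySem.Int.floordiv (PySem.List.pyGetD qs j 0) n| = |rem - PySem.Int.mod (PySem.List.pyGetD qs j 0) n| then (if rem = PySem.Int.mod (PySem.List.pyGetD qs j 0) n then a + 1 else a) + 1 else (if rem = PySem.Int.mod (PySem.List.pyGetD qs j 0) n then a + 1 else a)))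
          else a) 0)
          - ((PySem.List.pyRange 0 (qs.length : Int) 1).foldl (fun a j =>
          if j ≠ r then (if PySem.Int.floordiv (PySem.List.pyGetD qs r 0) n = PySem.Int.floordiv (PySem.List.pyGetD qs j 0) n then (if |PySem.Int.floordiv (PySem.List.pyGetD qs r 0) n - PySem.Int.floordiv (PySem.List.pyGetD qs j 0) n| = |PySem.Int.mod (PySem.List.pyGetD qs r 0) n - PySem.Int.mod (PySem.List.pyGetD qs j 0) n| then (if PySem.Int.mod (PySem.List.pyGetD qs r 0) n = PySem.Int.mod (PySem.List.pyGetD qs j 0) n then a + 1 else a) + 1 else (if PySem.Int.mod (PySem.List.pyGetD qs r 0) n = PySem.Int.mod (PySem.List.pyGetD qs j 0) n then a + 1 else a)) + 1 else (if |PySem.Int.floordiv (PySem.List.pyGetD qs r 0) n - PySem.Int.floordiv (PySem.List.pyGetD qs j 0) n| = |PySem.Int.mod (PySem.List.pyGetD qs r 0) n - PySem.Int.mod (PySem.List.pyGetD qs j 0) n| then (if PySem.Int.mod (PySem.List.pyGetD qs r 0) n = PySem.Int.mod (PySem.List.pyGetD qs j 0) n then a + 1 else a) + 1 else (if PySem.Int.mod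 (PySem.List.pyGetD qs r 0) n = PySem.Int.mod (PySem.List.pyGetD qs j 0) n then a + 1 else a)))
          else a) 0)), some (qs.set (r).toNat (r * n + rem)))
        | some bd =>
            if bd ≤ (((PySem.List.pyRange 0 (qs.length : Int) 1).foldl (fun a j =>
          if j ≠ r then (if r = PySem.Int.floordiv (PySem.List.pyGetD qs j 0) n then (if |r - PySem.Int.floordiv (PySem.List.pyGetD qs j 0) n| = |rem - PySem.Int.mod (PySem.List.pyGetD qs j 0) n| then (if rem = PySem.Int.mod (PySem.List.pyGetD qs j 0) n then a + 1 else a) + 1 else (if rem = PySem.Int.mod (PySem.List.pyGetD qs j 0) n then a + 1 else a)) + 1 else (if |r - PySem.Int.floordiv (PySem.List.pyGetD qs j 0) n| = |rem - PySem.Int.mod (PySem.List.pyGetD qs j 0) n| then (if rem = PySem.Int.mod (PySem.List.pyGetD qs j 0) n then a + 1 else a) + 1 else (if rem = PySem.Int.mod (PySem.List.pyGetD qs j 0) n then a + 1 else a)))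
          else a) 0)
          - ((PySem.List.pyRange 0 (qs.length : Int) 1).foldl (fun a j =>
          if j ≠ r then (if PySem.Int.floordiv (PySem.List.pyGetD qs r 0) n = PySem.Int.floordiv (PySem.List.pyGetD qs j 0) n then (if |PySem.Int.floordiv (PySem.List.pyGetD qs r 0) n - PySem.Int.floordiv (PySem.List.pyGetD qs j 0) n| = |PySem.Int.mod (PySem.List.pyGetD qs r 0) n - PySem.Int.mod (PySem.List.pyGetD qs j 0) n| then (if PySem.Int.mod (PySem.List.pyGetD qs r 0) n = PySem.Int.mod (PySem.List.pyGetD qs j 0) n then a + 1 else a) + 1 else (if PySem.Int.mod (PySem.List.pyGetD qs r 0) n = PySem.Int.mod (PySem.List.pyGetD qs j 0) n then a + 1 else a)) + 1 else (if |PySem.Int.floordiv (PySem.List.pyGetD qs r 0) n - PySem.Int.floordiv (PySem.List.pyGetD qs j 0) n| = |PySem.Int.mod (PySem.List.pyGetD qs r 0) n - PySem.Int.mod (PySem.List.pyGetD qs j 0) n| then (if PySem.Int.mod (PySem.List.pyGetD qs r 0) n = PySem.Int.mod (PySem.List.pyGetD qs j 0) n then a + 1 else a) + 1 else (if PySem.Int.mod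 (PySem.List.pyGetD qs r 0) n = PySem.Int.mod (PySem.List.pyGetD qs j 0) n then a + 1 else a)))
          else a) 0))
            then (some (((PySem.List.pyRange 0 (qs.length : Int) 1).foldl (fun a j =>
          if j ≠ r then (if r = PySem.Int.floordiv (PySem.List.pyGetD qs j 0) n then (if |r - PySem.Int.floordiv (PySem.List.pyGetD qs j 0) n| = |rem - PySem.Int.mod (PySem.List.pyGetD qs j 0) n| then (if rem = PySem.Int.mod (PySem.List.pyGetD qs j 0) n then a + 1 else a) + 1 else (if rem = PySem.Int.mod (PySem.List.pyGetD qs j 0) n then a + 1 else a)) + 1 else (if |r - PySem.Int.floordiv (PySem.List.pyGetD qs j 0) n| = |rem - PySem.Int.mod (PySem.List.pyGetD qs j 0) n| then (if rem = PySem.Int.mod (PySem.List.pyGetD qs j 0) n then a + 1 else a) + 1 else (if rem = PySem.Int.mod (PySem.List.pyGetD qs j 0) n then a + 1 else a)))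
          else a) 0)
          - ((PySem.List.pyRange 0 (qs.length : Int) 1).foldl (fun a j =>
          if j ≠ r then (if PySem.Int.floordiv (PySem.List.pyGetD qs r 0) n = PySem.Int.floordiv (PySem.List.pyGetD qs j 0) n then (if |PySem.Int.floordiv (PySem.List.pyGetD qs r 0) n - PySem.Int.floordiv (PySem.List.pyGetD qs j 0) n| = |PySem.Int.mod (PySem.List.pyGetD qs r 0) n - PySem.Int.mod (PySem.List.pyGetD qs j 0) n| then (if PySem.Int.mod (PySem.List.pyGetD qs r 0) n = PySem.Int.mod (PySem.List.pyGetD qs j 0) n then a + 1 else a) + 1 else (if PySem.Int.mod (PySem.List.pyGetD qs r 0) n = PySem.Int.mod (PySem.List.pyGetD qs j 0) n then a + 1 else a)) + 1 else (if |PySem.Int.floordiv (PySem.List.pyGetD qs r 0) n - PySem.Int.floordiv (PySem.List.pyGetD qs j 0) n| = |PySem.Int.mod (PySem.List.pyGetD qs r 0) n - PySem.Int.mod (PySem.List.pyGetD qs j 0) n| then (if PySem.Int.mod (PySem.List.pyGetD qs r 0) n = PySem.Int.mod (PySem.List.pyGetD qs j 0) n then a + 1 else a) + 1 else (if PySem.Int.mod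 (PySem.List.pyGetD qs r 0) n = PySem.Int.mod (PySem.List.pyGetD qs j 0) n then a + 1 else a)))
          else a) 0)), some (qs.set (r).toNat (r * n + rem)))
            else st)
         else st) := by
    intro r st rem
    by_cases h : rem = PySem.Int.mod (PySem.List.pyGetD qs r 0) n
    · rw [if_pos h, if_neg (by simp [h])]
    · rw [if_neg h, if_pos (by simp [h])]
  simp only [hswap]
  have hfilter : ∀ (r : Int) (st : Option Int × Option (List Int)),
      (PySem.List.pyRange 0 n 1).foldl (fun st rem =>
        if ¬ (rem == PySem.Int.mod (PySem.List.pyGetD qs r 0) n) = true then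
          (match st.1 with
        | none => (some (((PySem.List.pyRange 0 (qs.length : Int) 1).foldl (fun a j =>
          if j ≠ r then (if r = PySem.Int.floordiv (PySem.List.pyGetD qs j 0) n then (if |r - PySem.Int.floordiv (PySem.List.pyGetD qs j 0) n| = |rem - PySem.Int.mod (PySem.List.pyGetD qs j 0) n| then (if rem = PySem.Int.mod (PySem.List.pyGetD qs j 0) n then a + 1 else a) + 1 else (if rem = PySem.Int.mod (PySem.List.pyGetD qs j 0) n then a + 1 else a)) + 1 else (if |r - PySem.Int.floordiv (PySem.List.pyGetD qs j 0) n| = |rem - PySem.Int.mod (PySem.List.pyGetD qs j 0) n| then (if rem = PySem.Int.mod (PySem.List.pyGetD qs j 0) n then a + 1 else a) + 1 else (if rem = PySem.Int.mod (PySem.List.pyGetD qs j 0) n then a + 1 else a)))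
          else a) 0)
          - ((PySem.List.pyRange 0 (qs.length : Int) 1).foldl (fun a j =>
          if j ≠ r then (if PySem.Int.floordiv (PySem.List.pyGetD qs r 0) n = PySem.Int.floordiv (PySem.List.pyGetD qs j 0) n then (if |PySem.Int.floordiv (PySem.List.pyGetD qs r 0) n - PySem.Int.floordiv (PySem.List.pyGetD qs j 0) n| = |PySem.Int.mod (PySem.List.pyGetD qs r 0) n - PySem.Int.mod (PySem.List.pyGetD qs j 0) n| then (if PySem.Int.mod (PySem.List.pyGetD qs r 0) n = PySem.Int.mod (PySem.List.pyGetD qs j 0) n then a + 1 else a) + 1 else (if PySem.Int.mod (PySem.List.pyGetD qs r 0) n = PySem.Int.mod (PySem.List.pyGetD qs j 0) n then a + 1 else a)) + 1 else (if |PySem.Int.floordiv (PySem.List.pyGetD qs r 0) n - PySem.Int.floordiv (PySem.List.pyGetD qs j 0) n| = |PySem.Int.mod (PySem.List.pyGetD qs r 0) n - PySem.Int.mod (PySem.List.pyGetD qs j 0) n| then (if PySem.Int.mod (PySem.List.pyGetD qs r 0) n = PySem.Int.mod (PySem.List.pyGetD qs j 0) n then a + 1 else a) + 1 else (if PySem.Int.mod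 (PySem.List.pyGetD qs r 0) n = PySem.Int.mod (PySem.List.pyGetD qs j 0) n then a + 1 else a)))
          else a) 0)), some (qs.set (r).toNat (r * n + rem)))
        | some bd =>
            if bd ≤ (((PySem.List.pyRange 0 (qs.length : Int) 1).foldl (fun a j =>
          if j ≠ r then (if r = PySem.Int.floordiv (PySem.List.pyGetD qs j 0) n then (if |r - PySem.Int.floordiv (PySem.List.pyGetD qs j 0) n| = |rem - PySem.Int.mod (PySem.List.pyGetD qs j 0) n| then (if rem = PySem.Int.mod (PySem.List.pyGetD qs j 0) n then a + 1 else a) + 1 else (if rem = PySem.Int.mod (PySem.List.pyGetD qs j 0) n then a + 1 else a)) + 1 else (if |r - PySem.Int.floordiv (PySem.List.pyGetD qs j 0) n| = |rem - PySem.Int.mod (PySem.List.pyGetD qs j 0) n| then (if rem = PySem.Int.mod (PySem.List.pyGetD qs j 0) n then a + 1 else a) + 1 else (if rem = PySem.Int.mod (PySem.List.pyGetD qs j 0) n then a + 1 else a)))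
          else a) 0)
          - ((PySem.List.pyRange 0 (qs.length : Int) 1).foldl (fun a j =>
          if j ≠ r then (if PySem.Int.floordiv (PySem.List.pyGetD qs r 0) n = PySem.Int.floordiv (PySem.List.pyGetD qs j 0) n then (if |PySem.Int.floordiv (PySem.List.pyGetD qs r 0) n - PySem.Int.floordiv (PySem.List.pyGetD qs j 0) n| = |PySem.Int.mod (PySem.List.pyGetD qs r 0) n - PySem.Int.mod (PySem.List.pyGetD qs j 0) n| then (if PySem.Int.mod (PySem.List.pyGetD qs r 0) n = PySem.Int.mod (PySem.List.pyGetD qs j 0) n then a + 1 else a) + 1 else (if PySem.Int.mod (PySem.List.pyGetD qs r 0) n = PySem.Int.mod (PySem.List.pyGetD qs j 0) n then a + 1 else a)) + 1 else (if |PySem.Int.floordiv (PySem.List.pyGetD qs r 0) n - PySem.Int.floordiv (PySem.List.pyGetD qs j 0) n| = |PySem.Int.mod (PySem.List.pyGetD qs r 0) n - PySem.Int.mod (PySem.List.pyGetD qs j 0) n| then (if PySem.Int.mod (PySem.List.pyGetD qs r 0) n = PySem.Int.mod (PySem.List.pyGetD qs j 0) n then a + 1 else a) + 1 else (if PySem.Int.mod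 (PySem.List.pyGetD qs r 0) n = PySem.Int.mod (PySem.List.pyGetD qs j 0) n then a + 1 else a)))
          else a) 0))
            then (some (((PySem.List.pyRange 0 (qs.length : Int) 1).foldl (fun a j =>
          if j ≠ r then (if r = PySem.Int.floordiv (PySem.List.pyGetD qs j 0) n then (if |r - PySem.Int.floordiv (PySem.List.pyGetD qs j 0) n| = |rem - PySem.Int.mod (PySem.List.pyGetD qs j 0) n| then (if rem = PySem.Int.mod (PySem.List.pyGetD qs j 0) n then a + 1 else a) + 1 else (if rem = PySem.Int.mod (PySem.List.pyGetD qs j 0) n then a + 1 else a)) + 1 else (if |r - PySem.Int.floordiv (PySem.List.pyGetD qs j 0) n| = |rem - PySem.Int.mod (PySem.List.pyGetD qs j 0) n| then (if rem = PySem.Int.mod (PySem.List.pyGetD qs j 0) n then a + 1 else a) + 1 else (if rem = PySem.Int.mod (PySem.List.pyGetD qs j 0) n then a + 1 else a)))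
          else a) 0)
          - ((PySem.List.pyRange 0 (qs.length : Int) 1).foldl (fun a j =>
          if j ≠ r then (if PySem.Int.floordiv (PySem.List.pyGetD qs r 0) n = PySem.Int.floordiv (PySem.List.pyGetD qs j 0) n then (if |PySem.Int.floordiv (PySem.List.pyGetD qs r 0) n - PySem.Int.floordiv (PySem.List.pyGetD qs j 0) n| = |PySem.Int.mod (PySem.List.pyGetD qs r 0) n - PySem.Int.mod (PySem.List.pyGetD qs j 0) n| then (if PySem.Int.mod (PySem.List.pyGetD qs r 0) n = PySem.Int.mod (PySem.List.pyGetD qs j 0) n then a + 1 else a) + 1 else (if PySem.Int.mod (PySem.List.pyGetD qs r 0) n = PySem.Int.mod (PySem.List.pyGetD qs j 0) n then a + 1 else a)) + 1 else (if |PySem.Int.floordiv (PySem.List.pyGetD qs r 0) n - PySem.Int.floordiv (PySem.List.pyGetD qs j 0) n| = |PySem.Int.mod (PySem.List.pyGetD qs r 0) n - PySem.Int.mod (PySem.List.pyGetD qs j 0) n| then (if PySem.Int.mod (PySem.List.pyGetD qs r 0) n = PySem.Int.mod (PySem.List.pyGetD qs j 0) n then a + 1 else a) + 1 else (if PySem.Int.mod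 (PySem.List.pyGetD qs r 0) n = PySem.Int.mod (PySem.List.pyGetD qs j 0) n then a + 1 else a)))
          else a) 0)), some (qs.set (r).toNat (r * n + rem)))
            else st)
        else st) st
      = ((PySem.List.pyRange 0 n 1).filter
            (fun rem => !(rem == PySem.Int.mod (PySem.List.pyGetD qs r 0) n))).foldl
          (fun st rem =>
            match st.1 with
        | none => (some (((PySem.List.pyRange 0 (qs.length : Int) 1).foldl (fun a j =>
          if j ≠ r then (if r = PySem.Int.floordiv (PySem.List.pyGetD qs j 0) n then (if |r - PySem.Int.floordiv (PySem.List.pyGetD qs j 0) n| = |rem - PySem.Int.mod (PySem.List.pyGetD qs j 0) n| then (if rem = PySem.Int.mod (PySem.List.pyGetD qs j 0) n then a + 1 else a) + 1 else (if rem = PySem.Int.mod (PySem.List.pyGetD qs j 0) n then a + 1 else a)) + 1 else (if |r - PySem.Int.floordiv (PySem.List.pyGetD qs j 0) n| = |rem - PySem.Int.mod (PySem.List.pyGetD qs j 0) n| then (if rem = PySem.Int.mod (PySem.List.pyGetD qs j 0) n then a + 1 else a) + 1 else (if rem = PySem.Int.mod (PySem.List.pyGetD qs j 0) n then a + 1 else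 a)))
          else a) 0)
          - ((PySem.List.pyRange 0 (qs.length : Int) 1).foldl (fun a j =>
          if j ≠ r then (if PySem.Int.floordiv (PySem.List.pyGetD qs r 0) n = PySem.Int.floordiv (PySem.List.pyGetD qs j 0) n then (if |PySem.Int.floordiv (PySem.List.pyGetD qs r 0) n - PySem.Int.floordiv (PySem.List.pyGetD qs j 0) n| = |PySem.Int.mod (PySem.List.pyGetD qs r 0) n - PySem.Int.mod (PySem.List.pyGetD qs j 0) n| then (if PySem.Int.mod (PySem.List.pyGetD qs r 0) n = PySem.Int.mod (PySem.List.pyGetD qs j 0) n then a + 1 else a) + 1 else (if PySem.Int.mod (PySem.List.pyGetD qs r 0) n = PySem.Int.mod (PySem.List.pyGetD qs j 0) n then a + 1 else a)) + 1 else (if |PySem.Int.floordiv (PySem.List.pyGetD qs r 0) n - PySem.Int.floordiv (PySem.List.pyGetD qs j 0) n| = |PySem.Int.mod (PySem.List.pyGetD qs r 0) n - PySem.Int.mod (PySem.List.pyGetD qs j 0) n| then (if PySem.Int.mod (PySem.List.pyGetD qs r 0) n = PySem.Int.mod (PySem.List.pyGetD qs j 0) n then a + 1 else a) + 1 else (if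 PySem.Int.mod (PySem.List.pyGetD qs r 0) n = PySem.Int.mod (PySem.List.pyGetD qs j 0) n then a + 1 else a)))
          else a) 0)), some (qs.set (r).toNat (r * n + rem)))
        | some bd =>
            if bd ≤ (((PySem.List.pyRange 0 (qs.length : Int) 1).foldl (fun a j =>
          if j ≠ r then (if r = PySem.Int.floordiv (PySem.List.pyGetD qs j 0) n then (if |r - PySem.Int.floordiv (PySem.List.pyGetD qs j 0) n| = |rem - PySem.Int.mod (PySem.List.pyGetD qs j 0) n| then (if rem = PySem.Int.mod (PySem.List.pyGetD qs j 0) n then a + 1 else a) + 1 else (if rem = PySem.Int.mod (PySem.List.pyGetD qs j 0) n then a + 1 else a)) + 1 else (if |r - PySem.Int.floordiv (PySem.List.pyGetD qs j 0) n| = |rem - PySem.Int.mod (PySem.List.pyGetD qs j 0) n| then (if rem = PySem.Int.mod (PySem.List.pyGetD qs j 0) n then a + 1 else a) + 1 else (if rem = PySem.Int.mod (PySem.List.pyGetD qs j 0) n then a + 1 else a)))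
          else a) 0)
          - ((PySem.List.pyRange 0 (qs.length : Int) 1).foldl (fun a j =>
          if j ≠ r then (if PySem.Int.floordiv (PySem.List.pyGetD qs r 0) n = PySem.Int.floordiv (PySem.List.pyGetD qs j 0) n then (if |PySem.Int.floordiv (PySem.List.pyGetD qs r 0) n - PySem.Int.floordiv (PySem.List.pyGetD qs j 0) n| = |PySem.Int.mod (PySem.List.pyGetD qs r 0) n - PySem.Int.mod (PySem.List.pyGetD qs j 0) n| then (if PySem.Int.mod (PySem.List.pyGetD qs r 0) n = PySem.Int.mod (PySem.List.pyGetD qs j 0) n then a + 1 else a) + 1 else (if PySem.Int.mod (PySem.List.pyGetD qs r 0) n = PySem.Int.mod (PySem.List.pyGetD qs j 0) n then a + 1 else a)) + 1 else (if |PySem.Int.floordiv (PySem.List.pyGetD qs r 0) n - PySem.Int.floordiv (PySem.List.pyGetD qs j 0) n| = |PySem.Int.mod (PySem.List.pyGetD qs r 0) n - PySem.Int.mod (PySem.List.pyGetD qs j 0) n| then (if PySem.Int.mod (PySem.List.pyGetD qs r 0) n = PySem.Int.mod (PySem.List.pyGetD qs j 0) n then a + 1 else a) + 1 else (if PySem.Int.mod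 (PySem.List.pyGetD qs r 0) n = PySem.Int.mod (PySem.List.pyGetD qs j 0) n then a + 1 else a)))
          else a) 0))
            then (some (((PySem.List.pyRange 0 (qs.length : Int) 1).foldl (fun a j =>
          if j ≠ r then (if r = PySem.Int.floordiv (PySem.List.pyGetD qs j 0) n then (if |r - PySem.Int.floordiv (PySem.List.pyGetD qs j 0) n| = |rem - PySem.Int.mod (PySem.List.pyGetD qs j 0) n| then (if rem = PySem.Int.mod (PySem.List.pyGetD qs j 0) n then a + 1 else a) + 1 else (if rem = PySem.Int.mod (PySem.List.pyGetD qs j 0) n then a + 1 else a)) + 1 else (if |r - PySem.Int.floordiv (PySem.List.pyGetD qs j 0) n| = |rem - PySem.Int.mod (PySem.List.pyGetD qs j 0) n| then (if rem = PySem.Int.mod (PySem.List.pyGetD qs j 0) n then a + 1 else a) + 1 else (if rem = PySem.Int.mod (PySem.List.pyGetD qs j 0) n then a + 1 else a)))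
          else a) 0)
          - ((PySem.List.pyRange 0 (qs.length : Int) 1).foldl (fun a j =>
          if j ≠ r then (if PySem.Int.floordiv (PySem.List.pyGetD qs r 0) n = PySem.Int.floordiv (PySem.List.pyGetD qs j 0) n then (if |PySem.Int.floordiv (PySem.List.pyGetD qs r 0) n - PySem.Int.floordiv (PySem.List.pyGetD qs j 0) n| = |PySem.Int.mod (PySem.List.pyGetD qs r 0) n - PySem.Int.mod (PySem.List.pyGetD qs j 0) n| then (if PySem.Int.mod (PySem.List.pyGetD qs r 0) n = PySem.Int.mod (PySem.List.pyGetD qs j 0) n then a + 1 else a) + 1 else (if PySem.Int.mod (PySem.List.pyGetD qs r 0) n = PySem.Int.mod (PySem.List.pyGetD qs j 0) n then a + 1 else a)) + 1 else (if |PySem.Int.floordiv (PySem.List.pyGetD qs r 0) n - PySem.Int.floordiv (PySem.List.pyGetD qs j 0) n| = |PySem.Int.mod (PySem.List.pyGetD qs r 0) n - PySem.Int.mod (PySem.List.pyGetD qs j 0) n| then (if PySem.Int.mod (PySem.List.pyGetD qs r 0) n = PySem.Int.mod (PySem.List.pyGetD qs j 0) n then a + 1 else a) + 1 else (if PySem.Int.mod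 (PySem.List.pyGetD qs r 0) n = PySem.Int.mod (PySem.List.pyGetD qs j 0) n then a + 1 else a)))
          else a) 0)), some (qs.set (r).toNat (r * n + rem)))
            else st) st := by
    intro r st
    rw [PySem.List.foldl_ite_eq_foldl_filter
          (fun rem => ¬ (rem == PySem.Int.mod (PySem.List.pyGetD qs r 0) n) = true)]
    congr 1
    refine List.filter_congr (fun x _ => ?_)
    by_cases h : x = PySem.Int.mod (PySem.List.pyGetD qs r 0) n <;> simp [h]
  simp only [hfilter]
  have hflat : ∀ (st : Option Int × Option (List Int)),
      (PySem.List.pyRange 0 n 1).foldl (fun st r =>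
        (((PySem.List.pyRange 0 n 1).filter
            (fun rem => !(rem == PySem.Int.mod (PySem.List.pyGetD qs r 0) n))).foldl
          (fun st rem =>
            match st.1 with
        | none => (some (((PySem.List.pyRange 0 (qs.length : Int) 1).foldl (fun a j =>
          if j ≠ r then (if r = PySem.Int.floordiv (PySem.List.pyGetD qs j 0) n then (if |r - PySem.Int.floordiv (PySem.List.pyGetD qs j 0) n| = |rem - PySem.Int.mod (PySem.List.pyGetD qs j 0) n| then (if rem = PySem.Int.mod (PySem.List.pyGetD qs j 0) n then a + 1 else a) + 1 else (if rem = PySem.Int.mod (PySem.List.pyGetD qs j 0) n then a + 1 else a)) + 1 else (if |r - PySem.Int.floordiv (PySem.List.pyGetD qs j 0) n| = |rem - PySem.Int.mod (PySem.List.pyGetD qs j 0) n| then (if rem = PySem.Int.mod (PySem.List.pyGetD qs j 0) n then a + 1 else a) + 1 else (if rem = PySem.Int.mod (PySem.List.pyGetD qs j 0) n then a + 1 else a)))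
          else a) 0)
          - ((PySem.List.pyRange 0 (qs.length : Int) 1).foldl (fun a j =>
          if j ≠ r then (if PySem.Int.floordiv (PySem.List.pyGetD qs r 0) n = PySem.Int.floordiv (PySem.List.pyGetD qs j 0) n then (if |PySem.Int.floordiv (PySem.List.pyGetD qs r 0) n - PySem.Int.floordiv (PySem.List.pyGetD qs j 0) n| = |PySem.Int.mod (PySem.List.pyGetD qs r 0) n - PySem.Int.mod (PySem.List.pyGetD qs j 0) n| then (if PySem.Int.mod (PySem.List.pyGetD qs r 0) n = PySem.Int.mod (PySem.List.pyGetD qs j 0) n then a + 1 else a) + 1 else (if PySem.Int.mod (PySem.List.pyGetD qs r 0) n = PySem.Int.mod (PySem.List.pyGetD qs j 0) n then a + 1 else a)) + 1 else (if |PySem.Int.floordiv (PySem.List.pyGetD qs r 0) n - PySem.Int.floordiv (PySem.List.pyGetD qs j 0) n| = |PySem.Int.mod (PySem.List.pyGetD qs r 0) n - PySem.Int.mod (PySem.List.pyGetD qs j 0) n| then (if PySem.Int.mod (PySem.List.pyGetD qs r 0) n = PySem.Int.mod (PySem.List.pyGetD qs j 0) n then a + 1 else a) + 1 else (if PySem.Int.mod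 (PySem.List.pyGetD qs r 0) n = PySem.Int.mod (PySem.List.pyGetD qs j 0) n then a + 1 else a)))
          else a) 0)), some (qs.set (r).toNat (r * n + rem)))
        | some bd =>
            if bd ≤ (((PySem.List.pyRange 0 (qs.length : Int) 1).foldl (fun a j =>
          if j ≠ r then (if r = PySem.Int.floordiv (PySem.List.pyGetD qs j 0) n then (if |r - PySem.Int.floordiv (PySem.List.pyGetD qs j 0) n| = |rem - PySem.Int.mod (PySem.List.pyGetD qs j 0) n| then (if rem = PySem.Int.mod (PySem.List.pyGetD qs j 0) n then a + 1 else a) + 1 else (if rem = PySem.Int.mod (PySem.List.pyGetD qs j 0) n then a + 1 else a)) + 1 else (if |r - PySem.Int.floordiv (PySem.List.pyGetD qs j 0) n| = |rem - PySem.Int.mod (PySem.List.pyGetD qs j 0) n| then (if rem = PySem.Int.mod (PySem.List.pyGetD qs j 0) n then a + 1 else a) + 1 else (if rem = PySem.Int.mod (PySem.List.pyGetD qs j 0) n then a + 1 else a)))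
          else a) 0)
          - ((PySem.List.pyRange 0 (qs.length : Int) 1).foldl (fun a j =>
          if j ≠ r then (if PySem.Int.floordiv (PySem.List.pyGetD qs r 0) n = PySem.Int.floordiv (PySem.List.pyGetD qs j 0) n then (if |PySem.Int.floordiv (PySem.List.pyGetD qs r 0) n - PySem.Int.floordiv (PySem.List.pyGetD qs j 0) n| = |PySem.Int.mod (PySem.List.pyGetD qs r 0) n - PySem.Int.mod (PySem.List.pyGetD qs j 0) n| then (if PySem.Int.mod (PySem.List.pyGetD qs r 0) n = PySem.Int.mod (PySem.List.pyGetD qs j 0) n then a + 1 else a) + 1 else (if PySem.Int.mod (PySem.List.pyGetD qs r 0) n = PySem.Int.mod (PySem.List.pyGetD qs j 0) n then a + 1 else a)) + 1 else (if |PySem.Int.floordiv (PySem.List.pyGetD qs r 0) n - PySem.Int.floordiv (PySem.List.pyGetD qs j 0) n| = |PySem.Int.mod (PySem.List.pyGetD qs r 0) n - PySem.Int.mod (PySem.List.pyGetD qs j 0) n| then (if PySem.Int.mod (PySem.List.pyGetD qs r 0) n = PySem.Int.mod (PySem.List.pyGetD qs j 0) n then a + 1 else a) + 1 else (if PySem.Int.mod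 (PySem.List.pyGetD qs r 0) n = PySem.Int.mod (PySem.List.pyGetD qs j 0) n then a + 1 else a)))
          else a) 0))
            then (some (((PySem.List.pyRange 0 (qs.length : Int) 1).foldl (fun a j =>
          if j ≠ r then (if r = PySem.Int.floordiv (PySem.List.pyGetD qs j 0) n then (if |r - PySem.Int.floordiv (PySem.List.pyGetD qs j 0) n| = |rem - PySem.Int.mod (PySem.List.pyGetD qs j 0) n| then (if rem = PySem.Int.mod (PySem.List.pyGetD qs j 0) n then a + 1 else a) + 1 else (if rem = PySem.Int.mod (PySem.List.pyGetD qs j 0) n then a + 1 else a)) + 1 else (if |r - PySem.Int.floordiv (PySem.List.pyGetD qs j 0) n| = |rem - PySem.Int.mod (PySem.List.pyGetD qs j 0) n| then (if rem = PySem.Int.mod (PySem.List.pyGetD qs j 0) n then a + 1 else a) + 1 else (if rem = PySem.Int.mod (PySem.List.pyGetD qs j 0) n then a + 1 else a)))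
          else a) 0)
          - ((PySem.List.pyRange 0 (qs.length : Int) 1).foldl (fun a j =>
          if j ≠ r then (if PySem.Int.floordiv (PySem.List.pyGetD qs r 0) n = PySem.Int.floordiv (PySem.List.pyGetD qs j 0) n then (if |PySem.Int.floordiv (PySem.List.pyGetD qs r 0) n - PySem.Int.floordiv (PySem.List.pyGetD qs j 0) n| = |PySem.Int.mod (PySem.List.pyGetD qs r 0) n - PySem.Int.mod (PySem.List.pyGetD qs j 0) n| then (if PySem.Int.mod (PySem.List.pyGetD qs r 0) n = PySem.Int.mod (PySem.List.pyGetD qs j 0) n then a + 1 else a) + 1 else (if PySem.Int.mod (PySem.List.pyGetD qs r 0) n = PySem.Int.mod (PySem.List.pyGetD qs j 0) n then a + 1 else a)) + 1 else (if |PySem.Int.floordiv (PySem.List.pyGetD qs r 0) n - PySem.Int.floordiv (PySem.List.pyGetD qs j 0) n| = |PySem.Int.mod (PySem.List.pyGetD qs r 0) n - PySem.Int.mod (PySem.List.pyGetD qs j 0) n| then (if PySem.Int.mod (PySem.List.pyGetD qs r 0) n = PySem.Int.mod (PySem.List.pyGetD qs j 0) n then a + 1 else a) + 1 else (if PySem.Int.mod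 (PySem.List.pyGetD qs r 0) n = PySem.Int.mod (PySem.List.pyGetD qs j 0) n then a + 1 else a)))
          else a) 0)), some (qs.set (r).toNat (r * n + rem)))
            else st)
          st)) st
      = (pvCands qs n).foldl (fun st p =>
            match st.1 with
        | none => (some (((PySem.List.pyRange 0 (qs.length : Int) 1).foldl (fun a j =>
          if j ≠ p.1 then (if p.1 = PySem.Int.floordiv (PySem.List.pyGetD qs j 0) n then (if |p.1 - PySem.Int.floordiv (PySem.List.pyGetD qs j 0) n| = |p.2 - PySem.Int.mod (PySem.List.pyGetD qs j 0) n| then (if p.2 = PySem.Int.mod (PySem.List.pyGetD qs j 0) n then a + 1 else a) + 1 else (if p.2 = PySem.Int.mod (PySem.List.pyGetD qs j 0) n then a + 1 else a)) + 1 else (if |p.1 - PySem.Int.floordiv (PySem.List.pyGetD qs j 0) n| = |p.2 - PySem.Int.mod (PySem.List.pyGetD qs j 0) n| then (if p.2 = PySem.Int.mod (PySem.List.pyGetD qs j 0) n then a + 1 else a) + 1 else (if p.2 = PySem.Int.mod (PySem.List.pyGetD qs j 0) n then a + 1 else a)))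
          else a) 0)
          - ((PySem.List.pyRange 0 (qs.length : Int) 1).foldl (fun a j =>
          if j ≠ p.1 then (if PySem.Int.floordiv (PySem.List.pyGetD qs p.1 0) n = PySem.Int.floordiv (PySem.List.pyGetD qs j 0) n then (if |PySem.Int.floordiv (PySem.List.pyGetD qs p.1 0) n - PySem.Int.floordiv (PySem.List.pyGetD qs j 0) n| = |PySem.Int.mod (PySem.List.pyGetD qs p.1 0) n - PySem.Int.mod (PySem.List.pyGetD qs j 0) n| then (if PySem.Int.mod (PySem.List.pyGetD qs p.1 0) n = PySem.Int.mod (PySem.List.pyGetD qs j 0) n then a + 1 else a) + 1 else (if PySem.Int.mod (PySem.List.pyGetD qs p.1 0) n = PySem.Int.mod (PySem.List.pyGetD qs j 0) n then a + 1 else a)) + 1 else (if |PySem.Int.floordiv (PySem.List.pyGetD qs p.1 0) n - PySem.Int.floordiv (PySem.List.pyGetD qs j 0) n| = |PySem.Int.mod (PySem.List.pyGetD qs p.1 0) n - PySem.Int.mod (PySem.List.pyGetD qs j 0) n| then (if PySem.Int.mod (PySem.List.pyGetD qs p.1 0) n = PySem.Int.mod (PySem.List.pyGetD qs j 0) n then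 a + 1 else a) + 1 else (if PySem.Int.mod (PySem.List.pyGetD qs p.1 0) n = PySem.Int.mod (PySem.List.pyGetD qs j 0) n then a + 1 else a)))
          else a) 0)), some (qs.set (p.1).toNat (p.1 * n + p.2)))
        | some bd =>
            if bd ≤ (((PySem.List.pyRange 0 (qs.length : Int) 1).foldl (fun a j =>
          if j ≠ p.1 then (if p.1 = PySem.Int.floordiv (PySem.List.pyGetD qs j 0) n then (if |p.1 - PySem.Int.floordiv (PySem.List.pyGetD qs j 0) n| = |p.2 - PySem.Int.mod (PySem.List.pyGetD qs j 0) n| then (if p.2 = PySem.Int.mod (PySem.List.pyGetD qs j 0) n then a + 1 else a) + 1 else (if p.2 = PySem.Int.mod (PySem.List.pyGetD qs j 0) n then a + 1 else a)) + 1 else (if |p.1 - PySem.Int.floordiv (PySem.List.pyGetD qs j 0) n| = |p.2 - PySem.Int.mod (PySem.List.pyGetD qs j 0) n| then (if p.2 = PySem.Int.mod (PySem.List.pyGetD qs j 0) n then a + 1 else a) + 1 else (if p.2 = PySem.Int.mod (PySem.List.pyGetD qs j 0) n then a + 1 else a)))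
          else a) 0)
          - ((PySem.List.pyRange 0 (qs.length : Int) 1).foldl (fun a j =>
          if j ≠ p.1 then (if PySem.Int.floordiv (PySem.List.pyGetD qs p.1 0) n = PySem.Int.floordiv (PySem.List.pyGetD qs j 0) n then (if |PySem.Int.floordiv (PySem.List.pyGetD qs p.1 0) n - PySem.Int.floordiv (PySem.List.pyGetD qs j 0) n| = |PySem.Int.mod (PySem.List.pyGetD qs p.1 0) n - PySem.Int.mod (PySem.List.pyGetD qs j 0) n| then (if PySem.Int.mod (PySem.List.pyGetD qs p.1 0) n = PySem.Int.mod (PySem.List.pyGetD qs j 0) n then a + 1 else a) + 1 else (if PySem.Int.mod (PySem.List.pyGetD qs p.1 0) n = PySem.Int.mod (PySem.List.pyGetD qs j 0) n then a + 1 else a)) + 1 else (if |PySem.Int.floordiv (PySem.List.pyGetD qs p.1 0) n - PySem.Int.floordiv (PySem.List.pyGetD qs j 0) n| = |PySem.Int.mod (PySem.List.pyGetD qs p.1 0) n - PySem.Int.mod (PySem.List.pyGetD qs j 0) n| then (if PySem.Int.mod (PySem.List.pyGetD qs p.1 0) n = PySem.Int.mod (PySem.List.pyGetD qs j 0) n then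 a + 1 else a) + 1 else (if PySem.Int.mod (PySem.List.pyGetD qs p.1 0) n = PySem.Int.mod (PySem.List.pyGetD qs j 0) n then a + 1 else a)))
          else a) 0))
            then (some (((PySem.List.pyRange 0 (qs.length : Int) 1).foldl (fun a j =>
          if j ≠ p.1 then (if p.1 = PySem.Int.floordiv (PySem.List.pyGetD qs j 0) n then (if |p.1 - PySem.Int.floordiv (PySem.List.pyGetD qs j 0) n| = |p.2 - PySem.Int.mod (PySem.List.pyGetD qs j 0) n| then (if p.2 = PySem.Int.mod (PySem.List.pyGetD qs j 0) n then a + 1 else a) + 1 else (if p.2 = PySem.Int.mod (PySem.List.pyGetD qs j 0) n then a + 1 else a)) + 1 else (if |p.1 - PySem.Int.floordiv (PySem.List.pyGetD qs j 0) n| = |p.2 - PySem.Int.mod (PySem.List.pyGetD qs j 0) n| then (if p.2 = PySem.Int.mod (PySem.List.pyGetD qs j 0) n then a + 1 else a) + 1 else (if p.2 = PySem.Int.mod (PySem.List.pyGetD qs j 0) n then a + 1 else a)))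
          else a) 0)
          - ((PySem.List.pyRange 0 (qs.length : Int) 1).foldl (fun a j =>
          if j ≠ p.1 then (if PySem.Int.floordiv (PySem.List.pyGetD qs p.1 0) n = PySem.Int.floordiv (PySem.List.pyGetD qs j 0) n then (if |PySem.Int.floordiv (PySem.List.pyGetD qs p.1 0) n - PySem.Int.floordiv (PySem.List.pyGetD qs j 0) n| = |PySem.Int.mod (PySem.List.pyGetD qs p.1 0) n - PySem.Int.mod (PySem.List.pyGetD qs j 0) n| then (if PySem.Int.mod (PySem.List.pyGetD qs p.1 0) n = PySem.Int.mod (PySem.List.pyGetD qs j 0) n then a + 1 else a) + 1 else (if PySem.Int.mod (PySem.List.pyGetD qs p.1 0) n = PySem.Int.mod (PySem.List.pyGetD qs j 0) n then a + 1 else a)) + 1 else (if |PySem.Int.floordiv (PySem.List.pyGetD qs p.1 0) n - PySem.Int.floordiv (PySem.List.pyGetD qs j 0) n| = |PySem.Int.mod (PySem.List.pyGetD qs p.1 0) n - PySem.Int.mod (PySem.List.pyGetD qs j 0) n| then (if PySem.Int.mod (PySem.List.pyGetD qs p.1 0) n = PySem.Int.mod (PySem.List.pyGetD qs j 0) n then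 a + 1 else a) + 1 else (if PySem.Int.mod (PySem.List.pyGetD qs p.1 0) n = PySem.Int.mod (PySem.List.pyGetD qs j 0) n then a + 1 else a)))
          else a) 0)), some (qs.set (p.1).toNat (p.1 * n + p.2)))
            else st) st := by
    intro st
    rw [pvCands, List.foldl_flatMap]
    refine PySem.List.foldl_congr_mem _ _ _ _ (fun acc r _ => ?_)
    rw [List.foldl_map]
  rw [hflat]
  have hstepeq : ∀ (st : Option Int × Option (List Int)), ∀ p ∈ pvCands qs n,
      (match st.1 with
        | none => (some (((PySem.List.pyRange 0 (qs.length : Int) 1).foldl (fun a j =>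
          if j ≠ p.1 then (if p.1 = PySem.Int.floordiv (PySem.List.pyGetD qs j 0) n then (if |p.1 - PySem.Int.floordiv (PySem.List.pyGetD qs j 0) n| = |p.2 - PySem.Int.mod (PySem.List.pyGetD qs j 0) n| then (if p.2 = PySem.Int.mod (PySem.List.pyGetD qs j 0) n then a + 1 else a) + 1 else (if p.2 = PySem.Int.mod (PySem.List.pyGetD qs j 0) n then a + 1 else a)) + 1 else (if |p.1 - PySem.Int.floordiv (PySem.List.pyGetD qs j 0) n| = |p.2 - PySem.Int.mod (PySem.List.pyGetD qs j 0) n| then (if p.2 = PySem.Int.mod (PySem.List.pyGetD qs j 0) n then a + 1 else a) + 1 else (if p.2 = PySem.Int.mod (PySem.List.pyGetD qs j 0) n then a + 1 else a)))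
          else a) 0)
          - ((PySem.List.pyRange 0 (qs.length : Int) 1).foldl (fun a j =>
          if j ≠ p.1 then (if PySem.Int.floordiv (PySem.List.pyGetD qs p.1 0) n = PySem.Int.floordiv (PySem.List.pyGetD qs j 0) n then (if |PySem.Int.floordiv (PySem.List.pyGetD qs p.1 0) n - PySem.Int.floordiv (PySem.List.pyGetD qs j 0) n| = |PySem.Int.mod (PySem.List.pyGetD qs p.1 0) n - PySem.Int.mod (PySem.List.pyGetD qs j 0) n| then (if PySem.Int.mod (PySem.List.pyGetD qs p.1 0) n = PySem.Int.mod (PySem.List.pyGetD qs j 0) n then a + 1 else a) + 1 else (if PySem.Int.mod (PySem.List.pyGetD qs p.1 0) n = PySem.Int.mod (PySem.List.pyGetD qs j 0) n then a + 1 else a)) + 1 else (if |PySem.Int.floordiv (PySem.List.pyGetD qs p.1 0) n - PySem.Int.floordiv (PySem.List.pyGetD qs j 0) n| = |PySem.Int.mod (PySem.List.pyGetD qs p.1 0) n - PySem.Int.mod (PySem.List.pyGetD qs j 0) n| then (if PySem.Int.mod (PySem.List.pyGetD qs p.1 0) n = PySem.Int.mod (PySem.List.pyGetD qs j 0) n then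 a + 1 else a) + 1 else (if PySem.Int.mod (PySem.List.pyGetD qs p.1 0) n = PySem.Int.mod (PySem.List.pyGetD qs j 0) n then a + 1 else a)))
          else a) 0)), some (qs.set (p.1).toNat (p.1 * n + p.2)))
        | some bd =>
            if bd ≤ (((PySem.List.pyRange 0 (qs.length : Int) 1).foldl (fun a j =>
          if j ≠ p.1 then (if p.1 = PySem.Int.floordiv (PySem.List.pyGetD qs j 0) n then (if |p.1 - PySem.Int.floordiv (PySem.List.pyGetD qs j 0) n| = |p.2 - PySem.Int.mod (PySem.List.pyGetD qs j 0) n| then (if p.2 = PySem.Int.mod (PySem.List.pyGetD qs j 0) n then a + 1 else a) + 1 else (if p.2 = PySem.Int.mod (PySem.List.pyGetD qs j 0) n then a + 1 else a)) + 1 else (if |p.1 - PySem.Int.floordiv (PySem.List.pyGetD qs j 0) n| = |p.2 - PySem.Int.mod (PySem.List.pyGetD qs j 0) n| then (if p.2 = PySem.Int.mod (PySem.List.pyGetD qs j 0) n then a + 1 else a) + 1 else (if p.2 = PySem.Int.mod (PySem.List.pyGetD qs j 0) n then a + 1 else a)))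
          else a) 0)
          - ((PySem.List.pyRange 0 (qs.length : Int) 1).foldl (fun a j =>
          if j ≠ p.1 then (if PySem.Int.floordiv (PySem.List.pyGetD qs p.1 0) n = PySem.Int.floordiv (PySem.List.pyGetD qs j 0) n then (if |PySem.Int.floordiv (PySem.List.pyGetD qs p.1 0) n - PySem.Int.floordiv (PySem.List.pyGetD qs j 0) n| = |PySem.Int.mod (PySem.List.pyGetD qs p.1 0) n - PySem.Int.mod (PySem.List.pyGetD qs j 0) n| then (if PySem.Int.mod (PySem.List.pyGetD qs p.1 0) n = PySem.Int.mod (PySem.List.pyGetD qs j 0) n then a + 1 else a) + 1 else (if PySem.Int.mod (PySem.List.pyGetD qs p.1 0) n = PySem.Int.mod (PySem.List.pyGetD qs j 0) n then a + 1 else a)) + 1 else (if |PySem.Int.floordiv (PySem.List.pyGetD qs p.1 0) n - PySem.Int.floordiv (PySem.List.pyGetD qs j 0) n| = |PySem.Int.mod (PySem.List.pyGetD qs p.1 0) n - PySem.Int.mod (PySem.List.pyGetD qs j 0) n| then (if PySem.Int.mod (PySem.List.pyGetD qs p.1 0) n = PySem.Int.mod (PySem.List.pyGetD qs j 0) n then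 a + 1 else a) + 1 else (if PySem.Int.mod (PySem.List.pyGetD qs p.1 0) n = PySem.Int.mod (PySem.List.pyGetD qs j 0) n then a + 1 else a)))
          else a) 0))
            then (some (((PySem.List.pyRange 0 (qs.length : Int) 1).foldl (fun a j =>
          if j ≠ p.1 then (if p.1 = PySem.Int.floordiv (PySem.List.pyGetD qs j 0) n then (if |p.1 - PySem.Int.floordiv (PySem.List.pyGetD qs j 0) n| = |p.2 - PySem.Int.mod (PySem.List.pyGetD qs j 0) n| then (if p.2 = PySem.Int.mod (PySem.List.pyGetD qs j 0) n then a + 1 else a) + 1 else (if p.2 = PySem.Int.mod (PySem.List.pyGetD qs j 0) n then a + 1 else a)) + 1 else (if |p.1 - PySem.Int.floordiv (PySem.List.pyGetD qs j 0) n| = |p.2 - PySem.Int.mod (PySem.List.pyGetD qs j 0) n| then (if p.2 = PySem.Int.mod (PySem.List.pyGetD qs j 0) n then a + 1 else a) + 1 else (if p.2 = PySem.Int.mod (PySem.List.pyGetD qs j 0) n then a + 1 else a)))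
          else a) 0)
          - ((PySem.List.pyRange 0 (qs.length : Int) 1).foldl (fun a j =>
          if j ≠ p.1 then (if PySem.Int.floordiv (PySem.List.pyGetD qs p.1 0) n = PySem.Int.floordiv (PySem.List.pyGetD qs j 0) n then (if |PySem.Int.floordiv (PySem.List.pyGetD qs p.1 0) n - PySem.Int.floordiv (PySem.List.pyGetD qs j 0) n| = |PySem.Int.mod (PySem.List.pyGetD qs p.1 0) n - PySem.Int.mod (PySem.List.pyGetD qs j 0) n| then (if PySem.Int.mod (PySem.List.pyGetD qs p.1 0) n = PySem.Int.mod (PySem.List.pyGetD qs j 0) n then a + 1 else a) + 1 else (if PySem.Int.mod (PySem.List.pyGetD qs p.1 0) n = PySem.Int.mod (PySem.List.pyGetD qs j 0) n then a + 1 else a)) + 1 else (if |PySem.Int.floordiv (PySem.List.pyGetD qs p.1 0) n - PySem.Int.floordiv (PySem.List.pyGetD qs j 0) n| = |PySem.Int.mod (PySem.List.pyGetD qs p.1 0) n - PySem.Int.mod (PySem.List.pyGetD qs j 0) n| then (if PySem.Int.mod (PySem.List.pyGetD qs p.1 0) n = PySem.Int.mod (PySem.List.pyGetD qs j 0) n then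 a + 1 else a) + 1 else (if PySem.Int.mod (PySem.List.pyGetD qs p.1 0) n = PySem.Int.mod (PySem.List.pyGetD qs j 0) n then a + 1 else a)))
          else a) 0)), some (qs.set (p.1).toNat (p.1 * n + p.2)))
            else st)
      = (match st.1 with
          | none => (some (pvDelta qs n p), some (pvCand qs n p))
          | some bd => if bd ≤ pvDelta qs n p
              then (some (pvDelta qs n p), some (pvCand qs n p))
              else st) := by
    intro st p hp
    rcases pv_mem_cands hp with ⟨⟨h1, h2⟩, ⟨h3, h4⟩⟩
    rw [pv_foldC_eq qs n p.1 p.2 (by omega) h3 h4, pv_foldO_eq qs n p.1]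
    rfl
  rw [PySem.List.foldl_congr_mem _ _ _ _ hstepeq]
  have h := pv_pairfold qs n (pvCands qs n) none
  simp only [Option.map_none] at h
  rw [h]

lemma pv_max?_append_some {α : Type} {l : List (Int × α)} {m : Int × α} (x : Int × α)
    (h : PySem.List.max? l (fun q => q.1) = some m) :
    PySem.List.max? (l ++ [x]) (fun q => q.1) = if m.1 < x.1 then some x else some m := by
  unfold PySem.List.max? at h ⊢
  rw [List.foldl_append, h, List.foldl_cons, List.foldl_nil]

lemma pv_max?_append_none {α : Type} {l : List (Int × α)} (x : Int × α)
    (h : PySem.List.max? l (fun q => q.1) = none) :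
    PySem.List.max? (l ++ [x]) (fun q => q.1) = some x := by
  unfold PySem.List.max? at h ⊢
  rw [List.foldl_append, h, List.foldl_cons, List.foldl_nil]

-- replacing the value stored at one key leaves the running first-max fold's choice in place
lemma pv_max?_map {α : Type} (k : Int) (v : α) (l : List (Int × α)) :
    PySem.List.max? (l.map (fun p => if p.1 == k then (k, v) else p)) (fun q => q.1)
      = (PySem.List.max? l (fun q => q.1)).map (fun p => if p.1 == k then (k, v) else p) := by
  have hfst : ∀ p : Int × α, ((if p.1 == k then ((k, v) : Int × α) else p).1) = p.1 := by
    intro p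
    split
    · next h => exact (eq_of_beq h).symm
    · rfl
  induction l using List.reverseRecOn with
  | nil => rfl
  | append_singleton l x ih =>
      rw [List.map_append, List.map_cons, List.map_nil]
      cases hM : PySem.List.max? l (fun q => q.1) with
      | none =>
          have hM' : PySem.List.max? (l.map (fun p => if p.1 == k then (k, v) else p))
              (fun q => q.1) = none := by rw [ih, hM]; rfl
          rw [pv_max?_append_none _ hM', pv_max?_append_none _ hM]
          rfl
      | some m =>
          have hM' : PySem.List.max? (l.map (fun p => if p.1 == k then (k, v) else p))
              (fun q => q.1) = some (if m.1 == k then (k, v) else m) := by rw [ih, hM]; rfl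
          rw [pv_max?_append_some _ hM', pv_max?_append_some _ hM, hfst, hfst]
          by_cases hlt : m.1 < x.1
          · rw [if_pos hlt, if_pos hlt, Option.map_some]
          · rw [if_neg hlt, if_neg hlt, Option.map_some]

-- the dict keyed by (base + value) followed by max-by-key returns the last maximum
lemma pv_dict_max {α : Type} (base : Int) : ∀ (L : List (Int × α)),
    (PySem.List.max? ((L.foldl (fun d p => d.insert (base + p.1) p.2) PySem.Dict.empty).items)
        (fun q => q.1)
      = (pvBestFold L none).map (fun b => (base + b.1, b.2)))
    ∧ (∀ q : Int, ((L.foldl (fun d p => d.insert (base + p.1) p.2) PySem.Dict.empty).contains q) = true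
        ↔ q ∈ L.map (fun p => base + p.1))
    ∧ (∀ b, pvBestFold L none = some b → ∀ p ∈ L, p.1 ≤ b.1) := by
  intro L
  induction L using List.reverseRecOn with
  | nil =>
      refine ⟨rfl, fun q => by simp [PySem.Dict.empty, PySem.Dict.contains],
        fun b hb => by simp [pvBestFold] at hb⟩
  | append_singleton L a ih =>
      obtain ⟨ih1, ih2, ih3⟩ := ih
      have hfold : (L ++ [a]).foldl (fun d p => d.insert (base + p.1) p.2) PySem.Dict.empty
          = (L.foldl (fun d p => d.insert (base + p.1) p.2) PySem.Dict.empty).insert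
              (base + a.1) a.2 := by
        rw [List.foldl_append]; rfl
      have hbest : pvBestFold (L ++ [a]) none = pvBestStep (pvBestFold L none) a := by
        rw [pvBestFold, List.foldl_append]; rfl
      set D := L.foldl (fun d p => d.insert (base + p.1) p.2) PySem.Dict.empty with hD
      have hcont2 : ∀ q : Int, ((L ++ [a]).foldl (fun d p => d.insert (base + p.1) p.2)
            PySem.Dict.empty).contains q = true ↔ q ∈ (L ++ [a]).map (fun p => base + p.1) := by
        intro q
        rw [hfold, PySem.Dict.contains_insert, List.map_append, List.mem_append]
        simp only [Bool.or_eq_true, beq_iff_eq, List.map_cons, List.map_nil,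
          List.mem_singleton, ih2 q]
        tauto
      refine ⟨?_, hcont2, ?_⟩
      · -- the max?-of-items component
        rw [hfold, hbest]
        cases hB : pvBestFold L none with
        | none =>
            have hLnil : L = [] := (pvBestFold_none_iff L).1 hB
            subst hLnil
            simp only [pvBestStep, Option.map_some]
            rfl
        | some b =>
            have hbmem : b ∈ L := pvBestFold_mem L b hB
            have hMb : PySem.List.max? D.items (fun q => q.1) = some (base + b.1, b.2) := by
              rw [ih1, hB]; rfl
            have hbK : base + b.1 ∈ L.map (fun p => base + p.1) := List.mem_map_of_mem hbmem
            cases hc : D.contains (base + a.1) with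
            | false =>
                rw [PySem.Dict.items_insert_of_not_contains D a.2 hc,
                    pv_max?_append_some _ hMb]
                have hne' : b.1 ≠ a.1 := by
                  intro he
                  have ht : D.contains (base + a.1) = true :=
                    (ih2 _).2 (by rw [show base + a.1 = base + b.1 by omega]; exact hbK)
                  rw [hc] at ht
                  simp at ht
                simp only [pvBestStep]
                by_cases hle : b.1 ≤ a.1
                · rw [if_pos (by omega : base + b.1 < base + a.1), if_pos hle]
                  rfl
                · rw [if_neg (by omega : ¬ base + b.1 < base + a.1), if_neg hle]
                  rfl
            | true =>
                have hKa : base + a.1 ∈ L.map (fun p => base + p.1) := (ih2 _).1 hc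
                obtain ⟨p, hpL, hpe⟩ := List.mem_map.1 hKa
                have hpa : p.1 = a.1 := by omega
                have hale : a.1 ≤ b.1 := hpa ▸ ih3 b hB p hpL
                rw [PySem.Dict.items_insert_of_contains D a.2 hc, pv_max?_map, hMb,
                    Option.map_some]
                simp only [pvBestStep]
                by_cases hle : b.1 ≤ a.1
                · rw [if_pos (by simp only [beq_iff_eq]; omega :
                        ((base + b.1 == base + a.1) = true)), if_pos hle]
                  rfl
                · rw [if_neg (by simp only [beq_iff_eq]; omega :
                        ¬ ((base + b.1 == base + a.1) = true)), if_neg hle]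
                  rfl
      · -- the bound component
        intro b' hb' p hp
        rw [hbest] at hb'
        cases hB : pvBestFold L none with
        | none =>
            have hLnil : L = [] := (pvBestFold_none_iff L).1 hB
            subst hLnil
            rw [hB] at hb'
            simp only [pvBestStep] at hb'
            rcases List.mem_singleton.1 (by simpa using hp) with rfl
            rw [← Option.some.inj hb']
        | some b =>
            rw [hB] at hb'
            simp only [pvBestStep] at hb'
            rcases List.mem_append.1 hp with hpL | hpa
            · have h1 := ih3 b hB p hpL
              split_ifs at hb' with hle
              · rw [← Option.some.inj hb']; omega
              · rw [← Option.some.inj hb']; omega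
            · rcases List.mem_singleton.1 hpa with rfl
              split_ifs at hb' with hle
              · rw [← Option.some.inj hb']
              · rw [← Option.some.inj hb']; omega

-- ===== VERDICT (by name: the statement is the Claim_ definition above) =====
theorem best_neighbour_queens_spec : Claim_equal_best_neighbour_queens := by
  intro qs n c _ hpre
  unfold Spec_best_neighbour_queens
  by_cases hne : qs.length = 1
  · simp only [best_neighbour_queens, best_neighbour_queens_alt, if_pos hne]
  · obtain ⟨h2, hlen⟩ : 2 ≤ n ∧ n ≤ (qs.length : Int) := by
      rcases hpre with h1 | h
      · exact absurd h1 hne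
      · exact h
    have hn : (0 : Int) < n := by omega
    rw [pv_A_char qs n c hne h2, pv_B_char qs n c hne]
    simp only [select_best_neighbour]
    rw [List.foldl_map]
    have hcost : ∀ (d : PySem.Dict Int (List Int)), ∀ p ∈ pvCands qs n,
        d.insert (safe_queens_heuristic_cost (pvCand qs n p) n) (pvCand qs n p)
          = d.insert (pvSumPairs n qs + pvDelta qs n p) (pvCand qs n p) := by
      intro d p hp
      rcases pv_mem_cands hp with ⟨⟨hp0, hpn⟩, -⟩
      have hk : p.1.toNat < qs.length := by omega
      have hcast : ((p.1.toNat : Nat) : Int) = p.1 := Int.toNat_of_nonneg hp0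
      have hval : safe_queens_heuristic_cost (pvCand qs n p) n
          = pvSumPairs n qs + pvDelta qs n p := by
        rw [pv_safe_eq_sumPairs, pvCand, pv_cost_delta n qs p.1.toNat hk (p.1 * n + p.2),
            hcast, pvDelta]
        ring
      rw [hval]
    rw [PySem.List.foldl_congr_mem _ _ _ _ hcost]
    rw [show (pvCands qs n).foldl
          (fun d p => d.insert (pvSumPairs n qs + pvDelta qs n p) (pvCand qs n p))
          PySem.Dict.empty
        = ((pvCands qs n).map (fun p => (pvDelta qs n p, pvCand qs n p))).foldl
            (fun d q => d.insert (pvSumPairs n qs + q.1) q.2) PySem.Dict.empty from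
      (List.foldl_map (f := fun p => (pvDelta qs n p, pvCand qs n p))
        (g := fun (d : PySem.Dict Int (List Int)) (q : Int × List Int) =>
          d.insert (pvSumPairs n qs + q.1) q.2)
        (l := pvCands qs n) (init := PySem.Dict.empty)).symm]
    obtain ⟨hd1, -, -⟩ := pv_dict_max (pvSumPairs n qs)
      ((pvCands qs n).map (fun p => (pvDelta qs n p, pvCand qs n p)))
    rw [hd1]
    have hmem0 : ((0 : Int), if PySem.Int.mod (PySem.List.pyGetD qs 0 0) n = 0
        then (1 : Int) else 0) ∈ pvCands qs n := by
      unfold pvCands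
      refine List.mem_flatMap.2 ⟨0, PySem.List.mem_pyRange_one.2 ⟨le_refl 0, hn⟩, ?_⟩
      refine List.mem_map.2 ⟨_, List.mem_filter.2 ⟨?_, ?_⟩, rfl⟩
      · refine PySem.List.mem_pyRange_one.2 ⟨?_, ?_⟩ <;> split_ifs <;> omega
      · by_cases h : PySem.Int.mod (PySem.List.pyGetD qs 0 0) n = 0
        · rw [if_pos h, h]
          decide
        · rw [if_neg h]
          simp [Ne.symm h]
    have hne0 : pvCands qs n ≠ [] := List.ne_nil_of_mem hmem0
    cases hb : pvBestFold ((pvCands qs n).map (fun p => (pvDelta qs n p, pvCand qs n p))) none with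
    | none =>
        have hnil := (pvBestFold_none_iff _).1 hb
        rw [List.map_eq_nil_iff] at hnil
        exact absurd hnil hne0
    | some b => rfl
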